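-- pv_equiv track=rewrite | github.com/ksenialukova/courseworkfactory | kursach/method_potencialov.py | clipping
-- ===== SOURCE A (Python) =====
-- def clipping(x):
--     x_copy = x.copy()
--     flag = True
--     while flag:
--         flag = False
--         for i in range(len(x)):
--             counter = 0
--             for j in range(len(x[0])):
--                 if x_copy[i][j] >= 0:
--                     counter += 1
--             if counter == 1:
--                 for j in range(len(x[0])):
--                     x_copy[i][j] = -1
--                 flag = True
--
--         for j in range(len(x[0])):
--             counter = 0
--             for i in range(len(x)):
--                 if x_copy[i][j] >= 0:
--                     counter += 1
--             if counter == 1: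
--                 for i in range(len(x)):
--                     x_copy[i][j] = -1
--                 flag = True
--     return x_copy
-- ===== SOURCE B (Python) =====
-- def clipping(x):
--     # Worklist / count-decrement algorithm (Kahn-style peeling) instead of A's
--     # repeated full rescans; mutates the shared inner rows in place like A.
--     x_copy = x.copy()
--     R = len(x)
--     C = len(x[0])
--     rowcnt = [sum(1 for j in range(C) if x[i][j] >= 0) for i in range(R)]
--     colcnt = [sum(1 for i in range(R) if x[i][j] >= 0) for j in range(C)]
--     row_cleared = [False] * R
--     col_cleared = [False] * C
--     queue = [(True, i) for i in range(R) if rowcnt[i] == 1] \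
--           + [(False, j) for j in range(C) if colcnt[j] == 1]
--     head = 0
--     while head < len(queue):
--         is_row, k = queue[head]
--         head += 1
--         if is_row:
--             if row_cleared[k] or rowcnt[k] != 1:
--                 continue
--             row_cleared[k] = True
--             for j in range(C):
--                 if not col_cleared[j] and x[k][j] >= 0:
--                     colcnt[j] -= 1
--                     if colcnt[j] == 1:
--                         queue.append((False, j))
--         else:
--             if col_cleared[k] or colcnt[k] != 1:
--                 continue
--             col_cleared[k] = True
--             for i in range(R):
--                 if not row_cleared[i] and x[i][k] >= 0:
--                     rowcnt[i] -= 1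
--                     if rowcnt[i] == 1:
--                         queue.append((True, i))
--     for i in range(R):
--         if row_cleared[i]:
--             for j in range(C):
--                 x_copy[i][j] = -1
--     for j in range(C):
--         if col_cleared[j]:
--             for i in range(R):
--                 x_copy[i][j] = -1
--     return x_copy
-- ===== Notes on version B (the rewrite author's own statement) =====
-- stated objective: alternative
-- what changed: A repeatedly rescans the whole matrix and overwrites cleared lines with -1 until a fixpoint; B runs a Kahn-style worklist: it computes per-row/per-column counts of non-negative entries once, seeds a queue with count-1 lines, pops a line, re-checks its count, marks it cleared and decrements the counts of the crossing lines, enqueuing those that drop to 1, then writes the -1s back in one final pass, so the matrix is never rescanned.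
import Mathlib
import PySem

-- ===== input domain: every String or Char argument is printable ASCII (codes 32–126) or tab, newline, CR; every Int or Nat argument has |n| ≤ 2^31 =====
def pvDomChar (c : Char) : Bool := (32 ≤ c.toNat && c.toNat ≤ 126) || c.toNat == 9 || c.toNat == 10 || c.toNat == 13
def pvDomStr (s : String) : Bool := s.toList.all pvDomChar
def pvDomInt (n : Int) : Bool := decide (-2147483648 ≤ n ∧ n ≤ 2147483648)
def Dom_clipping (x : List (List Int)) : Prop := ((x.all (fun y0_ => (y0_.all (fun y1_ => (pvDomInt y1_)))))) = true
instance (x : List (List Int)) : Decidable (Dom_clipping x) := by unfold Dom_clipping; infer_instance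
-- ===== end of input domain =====

-- B replaces A's repeated rescan-and-overwrite fixpoint loop by a worklist algorithm with
-- per-line counts of non-negative entries and a single final write-back (objective:
-- alternative); B performs the same in-place mutation of the shared inner rows as A,
-- and the equivalence proved here is about the return value.

-- ===== PORT A =====
-- A, transliterated: while flag: clear every row with exactly one non-negative entry,
-- then every column; indices come from range(len(x)) / range(len(x[0])), always in range
-- under Pre_, so list indexing is ported with getD (exact there).
-- count of non-negative entries of row r over columns j < C  (inner j-loop of the row pass)
def pvRowCntA (r : List Int) (C : Nat) : Nat :=
  (List.range C).foldl (fun c j => if 0 ≤ r.getD j 0 then c + 1 else c) 0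

-- `for j in range(C): x_copy[i][j] = -1` on one row
def pvClearRowA (r : List Int) (C : Nat) : List Int :=
  (List.range C).foldl (fun r j => r.set j (-1)) r

-- the row pass (first `for i in range(len(x))` loop), carrying the flag
def pvRowPassA (R C : Nat) (st : List (List Int) × Bool) : List (List Int) × Bool :=
  (List.range R).foldl
    (fun st i =>
      let r := st.1.getD i []
      if pvRowCntA r C = 1 then (st.1.set i (pvClearRowA r C), true) else st) st

-- count of non-negative entries of column j over rows i < R (inner i-loop of the column pass)
def pvColCntA (m : List (List Int)) (j R : Nat) : Nat :=
  (List.range R).foldl (fun c i => if 0 ≤ (m.getD i []).getD j 0 then c + 1 else c) 0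

-- `for i in range(R): x_copy[i][j] = -1`
def pvClearColA (m : List (List Int)) (j R : Nat) : List (List Int) :=
  (List.range R).foldl (fun m i => m.set i ((m.getD i []).set j (-1))) m

-- the column pass (second `for j in range(len(x[0]))` loop)
def pvColPassA (R C : Nat) (st : List (List Int) × Bool) : List (List Int) × Bool :=
  (List.range C).foldl
    (fun st j =>
      if pvColCntA st.1 j R = 1 then (pvClearColA st.1 j R, true) else st) st

-- `while flag:` — fuel is a totality guard only; each continuing iteration turns a line
-- that still had a non-negative entry into an all -1 line, so R+C+1 iterations always
-- suffice on Pre_ inputs.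
def pvLoopA (R C : Nat) : Nat → List (List Int) → List (List Int)
  | 0, m => m
  | fuel + 1, m =>
      let st := pvColPassA R C (pvRowPassA R C (m, false))
      if st.2 then pvLoopA R C fuel st.1 else st.1

def clipping (x : List (List Int)) : List (List Int) :=
  pvLoopA x.length (x.getD 0 []).length (x.length + (x.getD 0 []).length + 1) x

-- ===== PORT B =====
-- B, transliterated: per-row / per-column counts of non-negative entries computed once,
-- a worklist (queue popped from the front, appended at the back) of lines whose count
-- reached 1, cleared-line marker lists, and one final write-back of the -1s.
-- rowcnt = [sum(1 for j in range(C) if x[i][j] >= 0) for i in range(R)]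
def pvRowCnt0 (x : List (List Int)) (C : Nat) : List Int :=
  (List.range x.length).map
    (fun i => (List.range C).foldl
      (fun c j => if 0 ≤ (x.getD i []).getD j 0 then c + 1 else c) (0 : Int))

-- colcnt = [sum(1 for i in range(R) if x[i][j] >= 0) for j in range(C)]
def pvColCnt0 (x : List (List Int)) (C : Nat) : List Int :=
  (List.range C).map
    (fun j => (List.range x.length).foldl
      (fun c i => if 0 ≤ (x.getD i []).getD j 0 then c + 1 else c) (0 : Int))

-- clearing row k: `for j in range(C): if not col_cleared[j] and x[k][j] >= 0:
--   colcnt[j] -= 1; if colcnt[j] == 1: queue.append((False, j))`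
def pvClearRowStep (x : List (List Int)) (C k : Nat) (ccnt : List Int) (clc : List Bool) :
    List Int × List (Bool × Nat) :=
  (List.range C).foldl
    (fun p j =>
      if clc.getD j false = false ∧ 0 ≤ (x.getD k []).getD j 0 then
        (p.1.set j (p.1.getD j 0 - 1),
         if p.1.getD j 0 - 1 == 1 then p.2 ++ [((false, j) : Bool × Nat)] else p.2)
      else p)
    (ccnt, ([] : List (Bool × Nat)))

-- clearing column k, symmetric over the rows
def pvClearColStep (x : List (List Int)) (k : Nat) (rcnt : List Int) (clr : List Bool) :
    List Int × List (Bool × Nat) :=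
  (List.range x.length).foldl
    (fun p i =>
      if clr.getD i false = false ∧ 0 ≤ (x.getD i []).getD k 0 then
        (p.1.set i (p.1.getD i 0 - 1),
         if p.1.getD i 0 - 1 == 1 then p.2 ++ [((true, i) : Bool × Nat)] else p.2)
      else p)
    (rcnt, ([] : List (Bool × Nat)))

-- `while head < len(queue):` — pop from the front, re-check, clear, decrement, enqueue.
-- Fuel is a totality guard only: every line enters the queue at most once.
def pvPop (x : List (List Int)) (C : Nat) :
    Nat → List (Bool × Nat) → List Int → List Int → List Bool → List Bool →
    List Bool × List Bool
  | 0, _, _, _, clr, clc => (clr, clc)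
  | _ + 1, [], _, _, clr, clc => (clr, clc)
  | fuel + 1, (b, k) :: rest, rcnt, ccnt, clr, clc =>
      if b then
        if clr.getD k false then pvPop x C fuel rest rcnt ccnt clr clc
        else if rcnt.getD k 0 == 1 then
          pvPop x C fuel (rest ++ (pvClearRowStep x C k ccnt clc).2) rcnt
            (pvClearRowStep x C k ccnt clc).1 (clr.set k true) clc
        else pvPop x C fuel rest rcnt ccnt clr clc
      else
        if clc.getD k false then pvPop x C fuel rest rcnt ccnt clr clc
        else if ccnt.getD k 0 == 1 then
          pvPop x C fuel (rest ++ (pvClearColStep x k rcnt clr).2)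
            (pvClearColStep x k rcnt clr).1 ccnt clr (clc.set k true)
        else pvPop x C fuel rest rcnt ccnt clr clc

-- final write-back: rows, then columns
def pvWriteRows (m : List (List Int)) (cr : List Bool) (R C : Nat) : List (List Int) :=
  (List.range R).foldl
    (fun m i =>
      if cr.getD i false then
        m.set i ((List.range C).foldl (fun r j => r.set j (-1)) (m.getD i [])) else m) m

def pvWriteCols (m : List (List Int)) (cc : List Bool) (R C : Nat) : List (List Int) :=
  (List.range C).foldl
    (fun m j =>
      if cc.getD j false then
        (List.range R).foldl (fun m i => m.set i ((m.getD i []).set j (-1))) m else m) m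

def clipping_alt (x : List (List Int)) : List (List Int) :=
  let C := (x.getD 0 []).length
  let rcnt := pvRowCnt0 x C
  let ccnt := pvColCnt0 x C
  let q := ((List.range x.length).filter (fun i => rcnt.getD i 0 == 1)).map
              (fun i => ((true, i) : Bool × Nat))
        ++ ((List.range C).filter (fun j => ccnt.getD j 0 == 1)).map
              (fun j => ((false, j) : Bool × Nat))
  let p := pvPop x C ((x.length + C + 1) * (x.length + C + 1)) q rcnt ccnt
              (List.replicate x.length false) (List.replicate C false)
  pvWriteCols (pvWriteRows x p.1 x.length C) p.2 x.length C

-- ===== PRECONDITION & SPEC =====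
-- Pre_ excludes exactly the inputs where the Python A raises IndexError: the empty list
-- (len(x[0]) fails) and ragged inputs with a row shorter than row 0 (x_copy[i][j] fails).
def Pre_clipping (x : List (List Int)) : Prop :=
  0 < x.length ∧ ∀ r ∈ x, (x.getD 0 []).length ≤ r.length
instance (x : List (List Int)) : Decidable (Pre_clipping x) := by unfold Pre_clipping; infer_instance

def pvWitness_clipping : List (List Int) := [[0, -5, 2], [-5, 3, -1], [-2, -2, -2]]

def Spec_clipping (x : List (List Int)) (out : List (List Int)) : Prop := out = clipping_alt x
instance (x : List (List Int)) (out : List (List Int)) : Decidable (Spec_clipping x out) := by unfold Spec_clipping; infer_instance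

-- ===== CLAIM (what is proved, stated in full; the proofs are below) =====
def Claim_equal_clipping : Prop := ∀ (x : List (List Int)), Dom_clipping x → Pre_clipping x → Spec_clipping x (clipping x)

-- ===== LEMMAS AND PROOFS =====

-- the round ("simultaneous pass") semantics both ports are reduced to
def pvAliveRowCnt (x : List (List Int)) (cc : List Bool) (i C : Nat) : Nat :=
  (List.range C).foldl
    (fun c j => if cc.getD j false = false ∧ 0 ≤ (x.getD i []).getD j 0 then c + 1 else c) 0

def pvAliveColCnt (x : List (List Int)) (cr : List Bool) (j R : Nat) : Nat :=
  (List.range R).foldl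
    (fun c i => if cr.getD i false = false ∧ 0 ≤ (x.getD i []).getD j 0 then c + 1 else c) 0

def pvNewRows (x : List (List Int)) (cr cc : List Bool) (R C : Nat) : List Nat :=
  (List.range R).filter (fun i => !cr.getD i false && (pvAliveRowCnt x cc i C == 1))

def pvNewCols (x : List (List Int)) (cr cc : List Bool) (R C : Nat) : List Nat :=
  (List.range C).filter (fun j => !cc.getD j false && (pvAliveColCnt x cr j R == 1))

def pvMark (l : List Bool) (idxs : List Nat) : List Bool :=
  idxs.foldl (fun l i => l.set i true) l

def pvLoopB (x : List (List Int)) (R C : Nat) : Nat → List Bool → List Bool → List Bool × List Bool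
  | 0, cr, cc => (cr, cc)
  | fuel + 1, cr, cc =>
      let nr := pvNewRows x cr cc R C
      let cr' := pvMark cr nr
      let nc := pvNewCols x cr' cc R C
      let cc' := pvMark cc nc
      if nr.isEmpty && nc.isEmpty then (cr', cc') else pvLoopB x R C fuel cr' cc'

-- the ideal state: the matrix A holds when the cleared lines are those marked in cr/cc
def pvMatRow (r : List Int) (ci : Bool) (cc : List Bool) (C : Nat) : List Int :=
  r.mapIdx (fun j v => if j < C ∧ (ci ∨ cc.getD j false) then -1 else v)

def pvMat (x : List (List Int)) (cr cc : List Bool) (C : Nat) : List (List Int) :=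
  x.mapIdx (fun i r => pvMatRow r (cr.getD i false) cc C)


-- getD helpers
lemma pv_getD_lt {α : Type} (l : List α) (d : α) {i : Nat} (h : i < l.length) : l.getD i d = l[i] :=
  List.getD_eq_getElem l d h

lemma pv_getD_ge {α : Type} (l : List α) (d : α) {i : Nat} (h : l.length ≤ i) : l.getD i d = d := by
  rw [List.getD_eq_getElem?_getD, List.getElem?_eq_none h]; rfl

lemma pv_getD_set_ne {α : Type} (l : List α) (d v : α) {i k : Nat} (h : i ≠ k) :
    (l.set k v).getD i d = l.getD i d := by
  by_cases hi : i < l.length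
  · rw [pv_getD_lt _ _ (by simpa using hi), pv_getD_lt _ _ hi,
      List.getElem_set_ne (by omega)]
  · rw [pv_getD_ge _ _ (by simpa using Nat.le_of_not_lt hi),
      pv_getD_ge _ _ (Nat.le_of_not_lt hi)]

lemma pv_getD_set_self {α : Type} (l : List α) (d v : α) {k : Nat} (h : k < l.length) :
    (l.set k v).getD k d = v := by
  rw [pv_getD_lt _ _ (by simpa using h), List.getElem_set_self]

lemma pv_list_ext_getD {α : Type} (d : α) {l₁ l₂ : List α} (h : l₁.length = l₂.length)
    (hp : ∀ i, i < l₁.length → l₁.getD i d = l₂.getD i d) : l₁ = l₂ := by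
  apply List.ext_getElem h
  intro i h1 h2
  have := hp i h1
  rwa [pv_getD_lt _ _ h1, pv_getD_lt _ _ h2] at this

-- lengths
lemma pvMatRow_length (r : List Int) (ci : Bool) (cc : List Bool) (C : Nat) :
    (pvMatRow r ci cc C).length = r.length := by simp [pvMatRow]

lemma pvMat_length (x : List (List Int)) (cr cc : List Bool) (C : Nat) :
    (pvMat x cr cc C).length = x.length := by simp [pvMat]

lemma pvMatRow_getElem (r : List Int) (ci : Bool) (cc : List Bool) (C : Nat) {j : Nat}
    (h : j < (pvMatRow r ci cc C).length) :
    (pvMatRow r ci cc C)[j] = if j < C ∧ (ci ∨ cc.getD j false) then -1 else r[j]'(by simpa [pvMatRow_length] using h) := by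
  simp [pvMatRow]

lemma pvMat_getD (x : List (List Int)) (cr cc : List Bool) (C : Nat) (i : Nat) :
    (pvMat x cr cc C).getD i [] = pvMatRow (x.getD i []) (cr.getD i false) cc C := by
  by_cases h : i < x.length
  · rw [pv_getD_lt _ _ (by simpa [pvMat_length] using h), pv_getD_lt _ _ h]
    simp [pvMat]
  · rw [pv_getD_ge _ _ (by simpa [pvMat_length] using Nat.le_of_not_lt h),
        pv_getD_ge _ _ (Nat.le_of_not_lt h)]
    simp [pvMatRow]

lemma pvMatRow_getD (r : List Int) (ci : Bool) (cc : List Bool) (C : Nat) (hr : C ≤ r.length)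
    {j : Nat} (hj : j < C) :
    (pvMatRow r ci cc C).getD j 0 = if ci ∨ cc.getD j false then -1 else r.getD j 0 := by
  have hjr : j < r.length := lt_of_lt_of_le hj hr
  rw [pv_getD_lt _ _ (by simpa [pvMatRow_length] using hjr), pv_getD_lt _ _ hjr,
      pvMatRow_getElem]
  simp [hj]


-- pvClearRowA characterisation
lemma pvClearRowA_succ (r : List Int) (C : Nat) :
    pvClearRowA r (C + 1) = (pvClearRowA r C).set C (-1) := by
  simp [pvClearRowA, List.range_succ]

lemma pvClearRowA_length (r : List Int) (C : Nat) : (pvClearRowA r C).length = r.length := by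
  induction C with
  | zero => simp [pvClearRowA]
  | succ n ih => simp [pvClearRowA_succ, ih]

lemma pvClearRowA_getElem (r : List Int) (C : Nat) {k : Nat} (h : k < (pvClearRowA r C).length) :
    (pvClearRowA r C)[k] = if k < C then -1 else r[k]'(by simpa [pvClearRowA_length] using h) := by
  induction C with
  | zero => simp [pvClearRowA]
  | succ n ih =>
      have h' : k < ((pvClearRowA r n).set n (-1)).length := by
        simpa [pvClearRowA_succ] using h
      simp only [pvClearRowA_succ]
      rw [List.getElem_set]
      by_cases hk : n = k
      · subst hk; simp
      · rw [if_neg hk, ih (by simpa using h')]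
        by_cases h1 : k < n
        · simp [h1, Nat.lt_succ_of_lt h1]
        · have h2 : ¬ k < n + 1 := by omega
          simp [h1, h2]

-- clearing an uncleared count row = marking it cleared
lemma pvClearRowA_matRow (r : List Int) (ci : Bool) (cc : List Bool) (C : Nat) :
    pvClearRowA (pvMatRow r ci cc C) C = pvMatRow r true cc C := by
  apply List.ext_getElem
  · simp [pvClearRowA_length, pvMatRow_length]
  · intro k h1 h2
    rw [pvClearRowA_getElem, pvMatRow_getElem, pvMatRow_getElem]
    by_cases hk : k < C <;> simp [hk]

-- pvMark
lemma pvMark_length (l : List Bool) (idxs : List Nat) : (pvMark l idxs).length = l.length := by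
  induction idxs generalizing l with
  | nil => rfl
  | cons a t ih => simp [pvMark, List.foldl] at ih ⊢; rw [ih, List.length_set]

lemma pvMark_getD (l : List Bool) (idxs : List Nat) (i : Nat)
    (hb : ∀ k ∈ idxs, k < l.length) :
    (pvMark l idxs).getD i false = (l.getD i false || idxs.contains i) := by
  induction idxs generalizing l with
  | nil => simp [pvMark]
  | cons a t ih =>
      have hal : a < l.length := hb a (by simp)
      show (pvMark (l.set a true) t).getD i false = _
      rw [ih _ (fun k hk => by simpa using hb k (by simp [hk]))]
      by_cases hai : a = i
      · subst hai
        rw [pv_getD_lt _ _ (by simpa using hal), List.getElem_set_self]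
        simp
      · have : (l.set a true).getD i false = l.getD i false := by
          by_cases hi : i < l.length
          · rw [pv_getD_lt _ _ (by simpa using hi), pv_getD_lt _ _ hi, List.getElem_set_ne hai]
          · rw [pv_getD_ge _ _ (by simpa using Nat.le_of_not_lt hi),
                pv_getD_ge _ _ (Nat.le_of_not_lt hi)]
        rw [this]
        simp [show i ≠ a from fun h => hai h.symm]


-- A's row count on the ideal matrix = the alive count (or 0 on a cleared row)
lemma pvRowCntA_mat (x : List (List Int)) (cc : List Bool) (C i : Nat)
    (hr : C ≤ (x.getD i []).length) (ci : Bool) :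
    pvRowCntA (pvMatRow (x.getD i []) ci cc C) C
      = if ci then 0 else pvAliveRowCnt x cc i C := by
  cases ci with
  | true =>
      rw [if_pos rfl]
      unfold pvRowCntA
      rw [PySem.List.foldl_congr_mem _ _ (fun c (_ : Nat) => c) _ ?_]
      · exact PySem.List.foldl_ignore _ _
      · intro acc j hj
        rw [pvMatRow_getD _ _ _ _ hr (List.mem_range.mp hj)]
        norm_num
  | false =>
      rw [if_neg (by simp)]
      unfold pvRowCntA pvAliveRowCnt
      apply PySem.List.foldl_congr_mem
      intro acc j hj
      rw [pvMatRow_getD _ _ _ _ hr (List.mem_range.mp hj)]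
      cases hcc : cc.getD j false <;> norm_num

-- A's column count on the ideal matrix
lemma pvColCntA_mat (x : List (List Int)) (cr cc : List Bool) (C j : Nat)
    (hx : ∀ r ∈ x, C ≤ r.length) (hj : j < C) :
    pvColCntA (pvMat x cr cc C) j x.length
      = if cc.getD j false then 0 else pvAliveColCnt x cr j x.length := by
  have key : ∀ i, i < x.length →
      ((pvMat x cr cc C).getD i []).getD j 0
        = if cr.getD i false ∨ cc.getD j false then -1 else (x.getD i []).getD j 0 := by
    intro i hi
    rw [pvMat_getD]
    exact pvMatRow_getD _ _ _ _ (hx _ (by rw [pv_getD_lt _ _ hi]; exact x.getElem_mem hi)) hj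
  cases hcc : cc.getD j false with
  | true =>
      rw [if_pos rfl]
      unfold pvColCntA
      rw [PySem.List.foldl_congr_mem _ _ (fun c (_ : Nat) => c) _ ?_]
      · exact PySem.List.foldl_ignore _ _
      · intro acc i hi
        rw [key i (List.mem_range.mp hi), hcc]
        norm_num
  | false =>
      rw [if_neg (by simp)]
      unfold pvColCntA pvAliveColCnt
      apply PySem.List.foldl_congr_mem
      intro acc i hi
      rw [key i (List.mem_range.mp hi), hcc]
      cases hcr : cr.getD i false <;> norm_num


-- setting a freshly cleared row in the ideal matrix = marking it
lemma pvMat_set_row (x : List (List Int)) (cr cc : List Bool) (C i : Nat)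
    (hi : i < x.length) (hicr : i < cr.length) :
    (pvMat x cr cc C).set i (pvMatRow (x.getD i []) true cc C)
      = pvMat x (cr.set i true) cc C := by
  apply List.ext_getElem
  · simp [pvMat_length]
  · intro k h1 h2
    have hk : k < x.length := by simpa [pvMat_length] using h2
    rw [List.getElem_set]
    by_cases hik : i = k
    · subst hik
      rw [if_pos rfl, pv_getD_lt _ _ hi]
      simp only [pvMat, List.getElem_mapIdx]
      rw [pv_getD_lt _ _ (by simpa using hicr), List.getElem_set_self]
    · rw [if_neg hik]
      simp only [pvMat, List.getElem_mapIdx]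
      have : (cr.set i true).getD k false = cr.getD k false := by
        by_cases hkc : k < cr.length
        · rw [pv_getD_lt _ _ (by simpa using hkc), pv_getD_lt _ _ hkc, List.getElem_set_ne hik]
        · rw [pv_getD_ge _ _ (by simpa using Nat.le_of_not_lt hkc),
              pv_getD_ge _ _ (Nat.le_of_not_lt hkc)]
      rw [this]

-- a fold that rewrites each row independently (unconditional form)
lemma pv_foldl_setrow (g : List Int → List Int) (n : Nat) (m : List (List Int)) :
    (List.range n).foldl (fun m i => m.set i (g (m.getD i []))) m
      = m.mapIdx (fun i r => if i < n then g r else r) := by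
  induction n with
  | zero =>
      simp only [List.range_zero, List.foldl_nil]
      apply List.ext_getElem
      · simp
      · intro k h1 h2; simp
  | succ n ih =>
      rw [List.range_succ, List.foldl_append, ih]
      simp only [List.foldl_cons, List.foldl_nil]
      apply List.ext_getElem
      · simp
      · intro k h1 h2
        have hkm : k < m.length := by simpa using h2
        rw [List.getElem_set]
        by_cases hnk : n = k
        · subst hnk
          rw [if_pos rfl]
          have : (m.mapIdx (fun i r => if i < n then g r else r)).getD n []
              = m[n]'hkm := by
            rw [pv_getD_lt _ _ (by simpa using hkm)]
            simp [List.getElem_mapIdx]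
          rw [this]
          simp
        · rw [if_neg hnk]
          simp only [List.getElem_mapIdx]
          rcases Nat.lt_trichotomy k n with h | h | h
          · simp [h, Nat.lt_succ_of_lt h]
          · omega
          · have h1 : ¬ k < n := by omega
            have h2 : ¬ k < n + 1 := by omega
            simp [h1, h2]

-- the same with a state-independent condition per row
lemma pv_foldl_rowupd (p : Nat → Bool) (g : List Int → List Int) (n : Nat) (m : List (List Int)) :
    (List.range n).foldl (fun m i => if p i then m.set i (g (m.getD i [])) else m) m
      = m.mapIdx (fun i r => if i < n ∧ p i then g r else r) := by
  induction n with
  | zero =>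
      simp only [List.range_zero, List.foldl_nil]
      apply List.ext_getElem
      · simp
      · intro k h1 h2; simp
  | succ n ih =>
      rw [List.range_succ, List.foldl_append, ih]
      simp only [List.foldl_cons, List.foldl_nil]
      by_cases hp : p n
      · rw [if_pos hp]
        apply List.ext_getElem
        · simp
        · intro k h1 h2
          have hkm : k < m.length := by simpa using h2
          rw [List.getElem_set]
          by_cases hnk : n = k
          · subst hnk
            rw [if_pos rfl]
            have : (m.mapIdx (fun i r => if i < n ∧ p i then g r else r)).getD n []
                = m[n]'hkm := by
              rw [pv_getD_lt _ _ (by simpa using hkm)]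
              simp [List.getElem_mapIdx]
            rw [this]
            simp [hp]
          · rw [if_neg hnk]
            simp only [List.getElem_mapIdx]
            rcases Nat.lt_trichotomy k n with h | h | h
            · simp [h, Nat.lt_succ_of_lt h]
            · omega
            · have h1 : ¬ (k < n ∧ p k = true) := by omega
              have h2 : ¬ (k < n + 1 ∧ p k = true) := by omega
              rw [if_neg h1, if_neg h2]
      · rw [if_neg hp]
        apply List.ext_getElem
        · simp
        · intro k h1 h2
          simp only [List.getElem_mapIdx]
          by_cases hnk : n = k
          · subst hnk
            have h1 : ¬ (n < n ∧ p n = true) := by simp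
            have h2 : ¬ (n < n + 1 ∧ p n = true) := by simp [hp]
            rw [if_neg h1, if_neg h2]
          · rcases Nat.lt_trichotomy k n with h | h | h
            · simp [h, Nat.lt_succ_of_lt h]
            · omega
            · have h1 : ¬ (k < n ∧ p k = true) := by omega
              have h2 : ¬ (k < n + 1 ∧ p k = true) := by omega
              rw [if_neg h1, if_neg h2]

-- clearing a column of the ideal matrix = marking it
lemma pvClearColA_mat (x : List (List Int)) (cr cc : List Bool) (C j : Nat)
    (hx : ∀ r ∈ x, C ≤ r.length) (hj : j < C) (hjcc : j < cc.length) :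
    pvClearColA (pvMat x cr cc C) j x.length = pvMat x cr (cc.set j true) C := by
  unfold pvClearColA
  rw [show x.length = (pvMat x cr cc C).length from (pvMat_length _ _ _ _).symm]
  refine Eq.trans (pv_foldl_setrow (fun r => r.set j (-1)) _ _) ?_
  apply List.ext_getElem
  · simp [pvMat_length]
  · intro k h1 h2
    have hk : k < x.length := by simpa [pvMat_length] using h2
    simp only [List.getElem_mapIdx]
    rw [if_pos (by simpa [pvMat_length] using hk)]
    simp only [pvMat, List.getElem_mapIdx]
    apply List.ext_getElem
    · simp [pvMatRow_length]
    · intro l hl1 hl2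
      have hlx : l < (x[k]'hk).length := by simpa [pvMatRow_length] using hl2
      have hjx : j < (x[k]'hk).length := lt_of_lt_of_le hj (hx _ (x.getElem_mem hk))
      rw [List.getElem_set]
      by_cases hjl : j = l
      · subst hjl
        rw [if_pos rfl, pvMatRow_getElem]
        have : (cc.set j true).getD j false = true := by
          rw [pv_getD_lt _ _ (by simpa using hjcc), List.getElem_set_self]
        rw [this]
        simp [hj]
      · rw [if_neg hjl, pvMatRow_getElem, pvMatRow_getElem]
        have : (cc.set j true).getD l false = cc.getD l false := by
          by_cases hlc : l < cc.length
          · rw [pv_getD_lt _ _ (by simpa using hlc), pv_getD_lt _ _ hlc, List.getElem_set_ne hjl]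
          · rw [pv_getD_ge _ _ (by simpa using Nat.le_of_not_lt hlc),
                pv_getD_ge _ _ (Nat.le_of_not_lt hlc)]
        rw [this]


-- the row pass advances the ideal state by the round's new rows
lemma pvRowPass_partial (x : List (List Int)) (cc : List Bool) (C : Nat)
    (hx : ∀ r ∈ x, C ≤ r.length) (cr : List Bool) (hcr : cr.length = x.length) :
    ∀ (n : Nat), n ≤ x.length → ∀ (b : Bool),
    (List.range n).foldl
      (fun st i =>
        let r := st.1.getD i []
        if pvRowCntA r C = 1 then (st.1.set i (pvClearRowA r C), true) else st)
      (pvMat x cr cc C, b)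
    = (pvMat x (pvMark cr ((List.range n).filter
          (fun i => !cr.getD i false && (pvAliveRowCnt x cc i C == 1)))) cc C,
       b || !((List.range n).filter
          (fun i => !cr.getD i false && (pvAliveRowCnt x cc i C == 1))).isEmpty) := by
  intro n
  induction n with
  | zero => intro _ b; simp [pvMark]
  | succ n ih =>
      intro hn b
      have hn' : n ≤ x.length := Nat.le_of_succ_le hn
      have hnx : n < x.length := hn
      rw [List.range_succ, List.foldl_append, ih hn' b]
      simp only [List.foldl_cons, List.foldl_nil]
      set q : Nat → Bool := fun i => !cr.getD i false && (pvAliveRowCnt x cc i C == 1) with hq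
      set F : List Nat := (List.range n).filter q with hF
      have hFb : ∀ k ∈ F, k < cr.length := by
        intro k hk
        have := List.mem_range.mp (List.mem_of_mem_filter hk)
        omega
      have hnF : F.contains n = false := by
        have : n ∉ F := fun hmem =>
          absurd (List.mem_range.mp (List.mem_of_mem_filter hmem)) (by omega)
        simpa using this
      have hcrn : (pvMark cr F).getD n false = cr.getD n false := by
        rw [pvMark_getD _ _ _ hFb, hnF, Bool.or_false]
      have hrow : (pvMat x (pvMark cr F) cc C).getD n []
          = pvMatRow (x.getD n []) (cr.getD n false) cc C := by
        rw [pvMat_getD, hcrn]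
      have hrx : C ≤ (x.getD n []).length := by
        rw [pv_getD_lt _ _ hnx]; exact hx _ (x.getElem_mem hnx)
      have hcnt : pvRowCntA ((pvMat x (pvMark cr F) cc C).getD n []) C
          = if cr.getD n false then 0 else pvAliveRowCnt x cc n C := by
        rw [hrow]; exact pvRowCntA_mat x cc C n hrx _
      show (if pvRowCntA ((pvMat x (pvMark cr F) cc C).getD n []) C = 1 then _ else _) = _
      by_cases hqn : q n = true
      · have hqn' := hqn
        rw [hq] at hqn'
        simp only [Bool.and_eq_true, Bool.not_eq_true', beq_iff_eq] at hqn'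
        obtain ⟨hcr0, halive⟩ := hqn'
        have hcnt1 : pvRowCntA ((pvMat x (pvMark cr F) cc C).getD n []) C = 1 := by
          rw [hcnt, hcr0]; simpa using halive
        rw [if_pos hcnt1]
        have hfilter : List.filter q (List.range n ++ [n]) = F ++ [n] := by
          rw [List.filter_append, hF]
          simp [hqn]
        rw [hfilter]
        have hmark : pvMark cr (F ++ [n]) = (pvMark cr F).set n true := by
          simp [pvMark, List.foldl_append]
        rw [hmark, hrow, hcr0]
        rw [pvClearRowA_matRow]
        rw [pvMat_set_row x (pvMark cr F) cc C n hnx (by rw [pvMark_length, hcr]; exact hnx)]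
        simp
      · have hqn' : q n = false := by simpa using hqn
        have hfilter : List.filter q (List.range n ++ [n]) = F := by
          rw [List.filter_append, hF]
          simp [hqn']
        rw [hfilter]
        have hcnt0 : ¬ pvRowCntA ((pvMat x (pvMark cr F) cc C).getD n []) C = 1 := by
          rw [hcnt]
          cases hcr0 : cr.getD n false with
          | true => simp
          | false =>
              have hcr0' : cr[n]?.getD false = false := by
                simpa [List.getD_eq_getElem?_getD] using hcr0
              rw [hq] at hqn'
              have himp : cr[n]?.getD false = false → ¬ pvAliveRowCnt x cc n C = 1 := by
                simpa using hqn'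
              exact himp hcr0'
        rw [if_neg hcnt0]


-- the column pass advances the ideal state by the round's new columns
lemma pvColPass_partial (x : List (List Int)) (cr : List Bool) (C : Nat)
    (hx : ∀ r ∈ x, C ≤ r.length) (cc : List Bool) (hccl : cc.length = C) :
    ∀ (n : Nat), n ≤ C → ∀ (b : Bool),
    (List.range n).foldl
      (fun st j =>
        if pvColCntA st.1 j x.length = 1 then (pvClearColA st.1 j x.length, true) else st)
      (pvMat x cr cc C, b)
    = (pvMat x cr (pvMark cc ((List.range n).filter
          (fun j => !cc.getD j false && (pvAliveColCnt x cr j x.length == 1)))) C,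
       b || !((List.range n).filter
          (fun j => !cc.getD j false && (pvAliveColCnt x cr j x.length == 1))).isEmpty) := by
  intro n
  induction n with
  | zero => intro _ b; simp [pvMark]
  | succ n ih =>
      intro hn b
      have hn' : n ≤ C := Nat.le_of_succ_le hn
      have hnC : n < C := hn
      rw [List.range_succ, List.foldl_append, ih hn' b]
      simp only [List.foldl_cons, List.foldl_nil]
      set q : Nat → Bool := fun j => !cc.getD j false && (pvAliveColCnt x cr j x.length == 1) with hq
      set F : List Nat := (List.range n).filter q with hF
      have hFb : ∀ k ∈ F, k < cc.length := by
        intro k hk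
        have := List.mem_range.mp (List.mem_of_mem_filter hk)
        omega
      have hnF : F.contains n = false := by
        have : n ∉ F := fun hmem =>
          absurd (List.mem_range.mp (List.mem_of_mem_filter hmem)) (by omega)
        simpa using this
      have hccn : (pvMark cc F).getD n false = cc.getD n false := by
        rw [pvMark_getD _ _ _ hFb, hnF, Bool.or_false]
      have hcnt : pvColCntA (pvMat x cr (pvMark cc F) C) n x.length
          = if cc.getD n false then 0 else pvAliveColCnt x cr n x.length := by
        rw [pvColCntA_mat x cr (pvMark cc F) C n hx hnC, hccn]
      by_cases hqn : q n = true
      · have hqn' := hqn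
        rw [hq] at hqn'
        simp only [Bool.and_eq_true, Bool.not_eq_true', beq_iff_eq] at hqn'
        obtain ⟨hcc0, halive⟩ := hqn'
        have hcnt1 : pvColCntA (pvMat x cr (pvMark cc F) C) n x.length = 1 := by
          rw [hcnt, hcc0]; simpa using halive
        rw [if_pos hcnt1]
        have hfilter : List.filter q (List.range n ++ [n]) = F ++ [n] := by
          rw [List.filter_append, hF]
          simp [hqn]
        rw [hfilter]
        have hmark : pvMark cc (F ++ [n]) = (pvMark cc F).set n true := by
          simp [pvMark, List.foldl_append]
        rw [hmark]
        rw [pvClearColA_mat x cr (pvMark cc F) C n hx hnC (by rw [pvMark_length, hccl]; exact hnC)]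
        simp
      · have hqn' : q n = false := by simpa using hqn
        have hfilter : List.filter q (List.range n ++ [n]) = F := by
          rw [List.filter_append, hF]
          simp [hqn']
        rw [hfilter]
        have hcnt0 : ¬ pvColCntA (pvMat x cr (pvMark cc F) C) n x.length = 1 := by
          rw [hcnt]
          cases hcc0 : cc.getD n false with
          | true => simp
          | false =>
              have hcc0' : cc[n]?.getD false = false := by
                simpa [List.getD_eq_getElem?_getD] using hcc0
              rw [hq] at hqn'
              have himp : cc[n]?.getD false = false → ¬ pvAliveColCnt x cr n x.length = 1 := by
                simpa using hqn'
              exact himp hcc0'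
        rw [if_neg hcnt0]


-- packaged pass lemmas
lemma pvRowPassA_eq (x : List (List Int)) (cc : List Bool) (C : Nat)
    (hx : ∀ r ∈ x, C ≤ r.length) (cr : List Bool) (hcr : cr.length = x.length) (b : Bool) :
    pvRowPassA x.length C (pvMat x cr cc C, b)
      = (pvMat x (pvMark cr (pvNewRows x cr cc x.length C)) cc C,
         b || !(pvNewRows x cr cc x.length C).isEmpty) := by
  unfold pvRowPassA pvNewRows
  exact pvRowPass_partial x cc C hx cr hcr x.length le_rfl b

lemma pvColPassA_eq (x : List (List Int)) (cr : List Bool) (C : Nat)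
    (hx : ∀ r ∈ x, C ≤ r.length) (cc : List Bool) (hccl : cc.length = C) (b : Bool) :
    pvColPassA x.length C (pvMat x cr cc C, b)
      = (pvMat x cr (pvMark cc (pvNewCols x cr cc x.length C)) C,
         b || !(pvNewCols x cr cc x.length C).isEmpty) := by
  unfold pvColPassA pvNewCols
  exact pvColPass_partial x cr C hx cc hccl C le_rfl b

-- A's loop simulates the round semantics step by step, for ANY fuel
lemma pvLoop_eq (x : List (List Int)) (C : Nat) (hx : ∀ r ∈ x, C ≤ r.length) :
    ∀ (fuel : Nat) (cr cc : List Bool), cr.length = x.length → cc.length = C →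
    pvLoopA x.length C fuel (pvMat x cr cc C)
      = pvMat x (pvLoopB x x.length C fuel cr cc).1 (pvLoopB x x.length C fuel cr cc).2 C := by
  intro fuel
  induction fuel with
  | zero => intro cr cc _ _; rfl
  | succ fuel ih =>
      intro cr cc hcr hccl
      show (let st := pvColPassA x.length C (pvRowPassA x.length C (pvMat x cr cc C, false))
            if st.2 then pvLoopA x.length C fuel st.1 else st.1) = _
      rw [pvRowPassA_eq x cc C hx cr hcr false,
          pvColPassA_eq x (pvMark cr (pvNewRows x cr cc x.length C)) C hx cc hccl _]
      set nr := pvNewRows x cr cc x.length C with hnr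
      set cr' := pvMark cr nr with hcr'
      set nc := pvNewCols x cr' cc x.length C with hnc
      set cc' := pvMark cc nc with hcc'
      have hcr'l : cr'.length = x.length := by rw [hcr', pvMark_length]; exact hcr
      have hcc'l : cc'.length = C := by rw [hcc', pvMark_length]; exact hccl
      show (if (false || !nr.isEmpty) || !nc.isEmpty then
              pvLoopA x.length C fuel (pvMat x cr' cc' C) else pvMat x cr' cc' C) = _
      have hB : pvLoopB x x.length C (fuel + 1) cr cc
          = if nr.isEmpty && nc.isEmpty then (cr', cc') else pvLoopB x x.length C fuel cr' cc' := by
        show (let nr0 := pvNewRows x cr cc x.length C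
              let cr0 := pvMark cr nr0
              let nc0 := pvNewCols x cr0 cc x.length C
              let cc0 := pvMark cc nc0
              if nr0.isEmpty && nc0.isEmpty then (cr0, cc0) else pvLoopB x x.length C fuel cr0 cc0) = _
        rfl
      rw [hB]
      cases hre : nr.isEmpty <;> cases hce : nc.isEmpty <;>
        simp only [hre, hce, Bool.false_or, Bool.not_true, Bool.not_false, Bool.or_false,
          Bool.or_true, Bool.and_self, Bool.true_and, Bool.false_and, Bool.and_false,
          if_true, if_false]
      · exact ih cr' cc' hcr'l hcc'l
      · exact ih cr' cc' hcr'l hcc'l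
      · exact ih cr' cc' hcr'l hcc'l
      · rfl


-- nothing cleared = the original matrix
lemma pvMat_init (x : List (List Int)) (C : Nat) :
    pvMat x (List.replicate x.length false) (List.replicate C false) C = x := by
  apply List.ext_getElem
  · simp [pvMat_length]
  · intro k h1 h2
    simp only [pvMat, List.getElem_mapIdx]
    have hk : (List.replicate x.length false).getD k false = false := by
      by_cases h : k < x.length
      · rw [pv_getD_lt _ _ (by simpa using h)]; simp
      · rw [pv_getD_ge _ _ (by simpa using Nat.le_of_not_lt h)]
    rw [hk]
    apply List.ext_getElem
    · simp [pvMatRow_length]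
    · intro l hl1 hl2
      rw [pvMatRow_getElem]
      have hl : (List.replicate C false).getD l false = false := by
        by_cases h : l < C
        · rw [pv_getD_lt _ _ (by simpa using h)]; simp
        · rw [pv_getD_ge _ _ (by simpa using Nat.le_of_not_lt h)]
      rw [hl]
      simp

-- the write-back produces exactly the ideal matrix
lemma pvWriteRows_eq (x : List (List Int)) (cr : List Bool) (C : Nat) :
    pvWriteRows x cr x.length C
      = x.mapIdx (fun i r => if i < x.length ∧ cr.getD i false then pvClearRowA r C else r) := by
  unfold pvWriteRows
  exact pv_foldl_rowupd (fun i => cr.getD i false) (fun r => pvClearRowA r C) x.length x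

lemma pvWriteBack_eq (x : List (List Int)) (cr cc : List Bool) (C : Nat) :
    pvWriteCols (pvWriteRows x cr x.length C) cc x.length C = pvMat x cr cc C := by
  have main : ∀ n, n ≤ C →
      (List.range n).foldl
        (fun m j =>
          if cc.getD j false then
            (List.range x.length).foldl (fun m i => m.set i ((m.getD i []).set j (-1))) m
          else m)
        (pvWriteRows x cr x.length C)
      = x.mapIdx (fun i r => r.mapIdx (fun j v =>
          if j < C ∧ (cr.getD i false ∨ (j < n ∧ cc.getD j false)) then -1 else v)) := by
    intro n
    induction n with
    | zero =>
        intro _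
        rw [pvWriteRows_eq]
        simp only [List.range_zero, List.foldl_nil]
        apply List.ext_getElem
        · simp
        · intro k h1 h2
          have hk : k < x.length := by simpa using h1
          simp only [List.getElem_mapIdx]
          by_cases hcrk : cr.getD k false
          · rw [if_pos ⟨hk, hcrk⟩]
            apply List.ext_getElem
            · simp [pvClearRowA_length]
            · intro l hl1 hl2
              rw [pvClearRowA_getElem]
              simp only [List.getElem_mapIdx]
              by_cases hlC : l < C
              · rw [if_pos hlC, if_pos ⟨hlC, Or.inl hcrk⟩]
              · rw [if_neg hlC, if_neg (fun h => hlC h.1)]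
          · rw [if_neg (fun h => hcrk h.2)]
            apply List.ext_getElem
            · simp
            · intro l hl1 hl2
              simp only [List.getElem_mapIdx]
              rw [if_neg (by
                rintro ⟨-, h | ⟨h0, -⟩⟩
                · exact absurd h (by simpa using hcrk)
                · omega)]
    | succ n ih =>
        intro hn
        have hn' : n ≤ C := Nat.le_of_succ_le hn
        have hnC : n < C := hn
        rw [List.range_succ, List.foldl_append, ih hn']
        simp only [List.foldl_cons, List.foldl_nil]
        set M := x.mapIdx (fun i r => r.mapIdx (fun j v =>
          if j < C ∧ (cr.getD i false ∨ (j < n ∧ cc.getD j false)) then -1 else v)) with hM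
        by_cases hccn : cc.getD n false
        · rw [if_pos hccn]
          refine Eq.trans (pv_foldl_setrow (fun r => r.set n (-1)) x.length M) ?_
          apply List.ext_getElem
          · simp [hM]
          · intro k h1 h2
            have hk : k < x.length := by simpa [hM] using h2
            simp only [List.getElem_mapIdx]
            rw [if_pos (by simpa [hM] using hk)]
            apply List.ext_getElem
            · simp [hM]
            · intro l hl1 hl2
              rw [List.getElem_set]
              by_cases hnl : n = l
              · subst hnl
                rw [if_pos rfl]
                simp only [hM, List.getElem_mapIdx]
                rw [if_pos ⟨hnC, Or.inr ⟨Nat.lt_succ_self n, hccn⟩⟩]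
              · rw [if_neg hnl]
                simp only [hM, List.getElem_mapIdx]
                refine if_congr ?_ rfl rfl
                constructor
                · rintro ⟨h1, h2⟩
                  refine ⟨h1, ?_⟩
                  rcases h2 with h | ⟨h3, h4⟩
                  · exact Or.inl h
                  · exact Or.inr ⟨by omega, h4⟩
                · rintro ⟨h1, h2⟩
                  refine ⟨h1, ?_⟩
                  rcases h2 with h | ⟨h3, h4⟩
                  · exact Or.inl h
                  · exact Or.inr ⟨by omega, h4⟩
        · rw [if_neg hccn]
          apply List.ext_getElem
          · simp [hM]
          · intro k h1 h2
            have hk : k < x.length := by simpa [hM] using h1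
            simp only [hM, List.getElem_mapIdx]
            apply List.ext_getElem
            · simp
            · intro l hl1 hl2
              simp only [List.getElem_mapIdx]
              refine if_congr ?_ rfl rfl
              constructor
              · rintro ⟨h1, h2⟩
                refine ⟨h1, ?_⟩
                rcases h2 with h | ⟨h3, h4⟩
                · exact Or.inl h
                · exact Or.inr ⟨by omega, h4⟩
              · rintro ⟨h1, h2⟩
                refine ⟨h1, ?_⟩
                rcases h2 with h | ⟨h3, h4⟩
                · exact Or.inl h
                · refine Or.inr ⟨?_, h4⟩
                  by_cases h5 : l < n
                  · exact h5
                  · exfalso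
                    have : l = n := by omega
                    subst this
                    exact hccn h4
  have hmain := main C le_rfl
  unfold pvWriteCols
  rw [hmain]
  apply List.ext_getElem
  · simp [pvMat_length]
  · intro k h1 h2
    have hk : k < x.length := by simpa using h1
    simp only [pvMat, List.getElem_mapIdx]
    apply List.ext_getElem
    · simp [pvMatRow_length]
    · intro l hl1 hl2
      rw [pvMatRow_getElem]
      simp only [List.getElem_mapIdx]
      refine if_congr ?_ rfl rfl
      constructor
      · rintro ⟨h1, h2⟩
        refine ⟨h1, ?_⟩
        rcases h2 with h | ⟨-, h⟩
        · exact Or.inl h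
        · exact Or.inr h
      · rintro ⟨h1, h2⟩
        refine ⟨h1, ?_⟩
        rcases h2 with h | h
        · exact Or.inl h
        · exact Or.inr ⟨h1, h⟩

-- ===== worklist (port B) machinery =====

-- counting folds are countP
lemma pv_foldl_cnt_nat {α : Type} (p : α → Prop) [DecidablePred p] :
    ∀ (l : List α) (n : Nat),
      l.foldl (fun c a => if p a then c + 1 else c) n
        = n + l.countP (fun a => decide (p a)) := by
  intro l
  induction l with
  | nil => intro n; simp
  | cons a t ih =>
      intro n
      simp only [List.foldl_cons, List.countP_cons, ih]
      by_cases h : p a <;> simp [h] <;> omega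

lemma pv_foldl_cnt_int {α : Type} (p : α → Prop) [DecidablePred p] :
    ∀ (l : List α) (n : Int),
      l.foldl (fun c a => if p a then c + 1 else c) n
        = n + (l.countP (fun a => decide (p a)) : Int) := by
  intro l
  induction l with
  | nil => intro n; simp
  | cons a t ih =>
      intro n
      simp only [List.foldl_cons, List.countP_cons, ih]
      by_cases h : p a <;> simp [h] <;> push_cast <;> ring

lemma pvArc_countP (x : List (List Int)) (cc : List Bool) (i C : Nat) :
    pvAliveRowCnt x cc i C
      = (List.range C).countP
          (fun j => decide (cc.getD j false = false ∧ 0 ≤ (x.getD i []).getD j 0)) := by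
  unfold pvAliveRowCnt
  rw [pv_foldl_cnt_nat]
  exact Nat.zero_add _

lemma pvAcc_countP (x : List (List Int)) (cr : List Bool) (j R : Nat) :
    pvAliveColCnt x cr j R
      = (List.range R).countP
          (fun i => decide (cr.getD i false = false ∧ 0 ≤ (x.getD i []).getD j 0)) := by
  unfold pvAliveColCnt
  rw [pv_foldl_cnt_nat]
  exact Nat.zero_add _

-- countP of two predicates differing in exactly one place of a nodup list
lemma pv_countP_single_diff :
    ∀ (l : List Nat), l.Nodup → ∀ (k : Nat), k ∈ l → ∀ (p q : Nat → Bool),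
      (∀ i ∈ l, i ≠ k → p i = q i) → q k = false →
      l.countP p = l.countP q + (if p k = true then 1 else 0) := by
  intro l
  induction l with
  | nil => intro _ k hk; cases hk
  | cons a t ih =>
      intro hnd k hk p q hpq hq
      have hnd' := List.nodup_cons.mp hnd
      rcases List.mem_cons.mp hk with h | h
      · subst h
        have ht : t.countP p = t.countP q := by
          apply List.countP_congr
          intro i hi
          rw [hpq i (List.mem_cons_of_mem _ hi) (fun he => hnd'.1 (he ▸ hi))]
        simp only [List.countP_cons, ht, hq]
        by_cases hp : p k = true <;> simp [hp] <;> omega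
      · have ha : p a = q a := hpq a (List.mem_cons_self) (fun he => hnd'.1 (he ▸ h))
        simp only [List.countP_cons, ih hnd'.2 k h p q
          (fun i hi hne => hpq i (List.mem_cons_of_mem _ hi) hne) hq, ha]
        omega

-- clearing one row from the alive column count
lemma pvAcc_set (x : List (List Int)) (clr : List Bool) (j k : Nat)
    (hlr : clr.length = x.length) (hk : k < x.length) (hck : clr.getD k false = false) :
    pvAliveColCnt x clr j x.length
      = pvAliveColCnt x (clr.set k true) j x.length
        + (if 0 ≤ (x.getD k []).getD j 0 then 1 else 0) := by
  rw [pvAcc_countP, pvAcc_countP]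
  have hkt : (clr.set k true).getD k false = true :=
    pv_getD_set_self _ _ _ (show k < clr.length from hlr ▸ hk)
  have hmain := pv_countP_single_diff (List.range x.length) (List.nodup_range) k
    (List.mem_range.mpr hk)
    (fun i => decide (clr.getD i false = false ∧ 0 ≤ (x.getD i []).getD j 0))
    (fun i => decide ((clr.set k true).getD i false = false ∧ 0 ≤ (x.getD i []).getD j 0))
    ?_ ?_
  · rw [hmain]
    congr 1
    by_cases hcell : 0 ≤ (x.getD k []).getD j 0
    · rw [if_pos (decide_eq_true (show _ ∧ _ from ⟨hck, hcell⟩)), if_pos hcell]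
    · rw [if_neg (fun h => hcell (of_decide_eq_true h).2), if_neg hcell]
  · intro i _ hne
    rw [decide_eq_decide]
    rw [pv_getD_set_ne _ _ _ hne]
  · apply decide_eq_false
    rintro ⟨h, -⟩
    rw [hkt] at h
    cases h

-- clearing one column from the alive row count
lemma pvArc_set (x : List (List Int)) (clc : List Bool) (i k C : Nat)
    (hk : k < C) (hck : clc.getD k false = false) (hlen : clc.length = C) :
    pvAliveRowCnt x clc i C
      = pvAliveRowCnt x (clc.set k true) i C
        + (if 0 ≤ (x.getD i []).getD k 0 then 1 else 0) := by
  rw [pvArc_countP, pvArc_countP]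
  have := pv_countP_single_diff (List.range C) (List.nodup_range) k
    (List.mem_range.mpr hk)
    (fun j => decide (clc.getD j false = false ∧ 0 ≤ (x.getD i []).getD j 0))
    (fun j => decide ((clc.set k true).getD j false = false ∧ 0 ≤ (x.getD i []).getD j 0))
    ?_ ?_
  · rw [this]
    congr 1
    by_cases hcell : 0 ≤ (x.getD i []).getD k 0
    · rw [if_pos (decide_eq_true (show _ ∧ _ from ⟨hck, hcell⟩)), if_pos hcell]
    · rw [if_neg (fun h => hcell (of_decide_eq_true h).2), if_neg hcell]
  · intro j _ hne
    rw [decide_eq_decide]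
    rw [pv_getD_set_ne _ _ _ hne]
  · apply decide_eq_false
    rintro ⟨h, -⟩
    rw [pv_getD_set_self _ false true (show k < clc.length from hlen ▸ hk)] at h
    cases h

-- the uncleared-line count, the termination measure
def pvUnc (l : List Bool) : Nat := l.countP (fun b => !b)

lemma pvUnc_replicate (n : Nat) : pvUnc (List.replicate n false) = n := by
  unfold pvUnc
  induction n with
  | zero => rfl
  | succ n ih => rw [List.replicate_succ, List.countP_cons]; simp [ih]

lemma pvUnc_set_eq : ∀ (l : List Bool) (k : Nat), k < l.length → l.getD k false = false →
    pvUnc (l.set k true) + 1 = pvUnc l := by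
  intro l
  induction l with
  | nil => intro k hk; simp at hk
  | cons a t ih =>
      intro k hk h0
      cases k with
      | zero =>
          have : a = false := by simpa using h0
          subst this
          simp [pvUnc, List.countP_cons]
      | succ k =>
          have hk' : k < t.length := by simpa using hk
          have h0' : t.getD k false = false := by simpa using h0
          have := ih k hk' h0'
          simp only [List.set, pvUnc, List.countP_cons] at this ⊢
          omega

lemma pvUnc_set_le (l : List Bool) (k : Nat) : pvUnc (l.set k true) ≤ pvUnc l := by
  by_cases hk : k < l.length
  · cases h0 : l.getD k false with
    | false => have := pvUnc_set_eq l k hk h0; omega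
    | true =>
        have : l.set k true = l := by
          apply List.ext_getElem (by simp)
          intro i h1 h2
          rw [List.getElem_set]
          by_cases hik : k = i
          · subst hik
            rw [pv_getD_lt _ _ hk] at h0
            simp [h0]
          · simp [hik]
        rw [this]
  · rw [List.set_eq_of_length_le (Nat.le_of_not_lt hk)]

lemma pvUnc_mark_le (l : List Bool) (idxs : List Nat) : pvUnc (pvMark l idxs) ≤ pvUnc l := by
  induction idxs generalizing l with
  | nil => exact le_rfl
  | cons a t ih =>
      calc pvUnc (pvMark (l.set a true) t) ≤ pvUnc (l.set a true) := ih _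
        _ ≤ pvUnc l := pvUnc_set_le l a

lemma pvUnc_mark_lt (l : List Bool) (a : Nat) (t : List Nat)
    (ha : a < l.length) (h0 : l.getD a false = false) :
    pvUnc (pvMark l (a :: t)) < pvUnc l := by
  have h1 : pvUnc (pvMark (l.set a true) t) ≤ pvUnc (l.set a true) := pvUnc_mark_le _ _
  have h2 := pvUnc_set_eq l a ha h0
  show pvUnc (pvMark (l.set a true) t) < pvUnc l
  omega

-- pvPop on the empty queue returns the cleared sets unchanged
lemma pvPop_nil (x : List (List Int)) (C : Nat) (F : Nat) (rcnt ccnt : List Int)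
    (clr clc : List Bool) : pvPop x C F [] rcnt ccnt clr clc = (clr, clc) := by
  cases F <;> rfl

-- characterisation of the clearing folds
lemma pvClearStep_spec_gen (P : Nat → Prop) [DecidablePred P] (mk : Nat → Bool × Nat) :
    ∀ (n : Nat) (cnt : List Int),
      ((List.range n).foldl
        (fun p j =>
          if P j then
            (p.1.set j (p.1.getD j 0 - 1),
             if p.1.getD j 0 - 1 == 1 then p.2 ++ [mk j] else p.2)
          else p) (cnt, ([] : List (Bool × Nat)))).1.length = cnt.length
      ∧ (∀ j, j < cnt.length →
          ((List.range n).foldl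
            (fun p j =>
              if P j then
                (p.1.set j (p.1.getD j 0 - 1),
                 if p.1.getD j 0 - 1 == 1 then p.2 ++ [mk j] else p.2)
              else p) (cnt, ([] : List (Bool × Nat)))).1.getD j 0
            = if j < n ∧ P j then cnt.getD j 0 - 1 else cnt.getD j 0)
      ∧ ((List.range n).foldl
          (fun p j =>
            if P j then
              (p.1.set j (p.1.getD j 0 - 1),
               if p.1.getD j 0 - 1 == 1 then p.2 ++ [mk j] else p.2)
            else p) (cnt, ([] : List (Bool × Nat)))).2
          = ((List.range n).filter (fun j => decide (P j) && (cnt.getD j 0 == 2))).map mk := by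
  intro n
  induction n with
  | zero =>
      intro cnt
      refine ⟨rfl, ?_, rfl⟩
      intro j hj
      simp
  | succ n ih =>
      intro cnt
      obtain ⟨ih1, ih2, ih3⟩ := ih cnt
      set s := (List.range n).foldl
        (fun p j =>
          if P j then
            (p.1.set j (p.1.getD j 0 - 1),
             if p.1.getD j 0 - 1 == 1 then p.2 ++ [mk j] else p.2)
          else p) (cnt, ([] : List (Bool × Nat))) with hs
      have hstep : (List.range (n + 1)).foldl
          (fun p j =>
            if P j then
              (p.1.set j (p.1.getD j 0 - 1),
               if p.1.getD j 0 - 1 == 1 then p.2 ++ [mk j] else p.2)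
            else p) (cnt, ([] : List (Bool × Nat)))
          = if P n then
              (s.1.set n (s.1.getD n 0 - 1),
               if s.1.getD n 0 - 1 == 1 then s.2 ++ [mk n] else s.2)
            else s := by
        rw [List.range_succ, List.foldl_append, ← hs]
        simp
      have hCget : s.1.getD n 0 = cnt.getD n 0 := by
        by_cases hlt : n < cnt.length
        · rw [ih2 n hlt]
          simp
        · rw [pv_getD_ge _ _ (by rw [ih1]; exact Nat.le_of_not_lt hlt),
              pv_getD_ge _ _ (Nat.le_of_not_lt hlt)]
      have hfilter : (List.range (n + 1)).filter (fun j => decide (P j) && (cnt.getD j 0 == 2))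
          = (List.range n).filter (fun j => decide (P j) && (cnt.getD j 0 == 2))
            ++ (if (decide (P n) && (cnt.getD n 0 == 2)) = true then [n] else []) := by
        rw [List.range_succ, List.filter_append, List.filter_singleton, Bool.cond_eq_if]
      have hbeq : ((cnt.getD n 0 - 1 == 1) : Bool) = (cnt.getD n 0 == 2) := by
        rw [Bool.eq_iff_iff]
        simp only [beq_iff_eq]
        omega
      rw [hstep]
      by_cases hP : P n
      · rw [if_pos hP]
        refine ⟨?_, ?_, ?_⟩
        · simp [ih1]
        · intro j hj
          by_cases hjn : j = n
          · subst hjn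
            rw [pv_getD_set_self _ _ _ (by rw [ih1]; exact hj), hCget,
                if_pos ⟨Nat.lt_succ_self j, hP⟩]
          · rw [pv_getD_set_ne _ _ _ hjn, ih2 j hj]
            refine if_congr ⟨fun h => ⟨Nat.lt_succ_of_lt h.1, h.2⟩, fun h => ⟨?_, h.2⟩⟩ rfl rfl
            omega
        · rw [hfilter, hCget, hbeq]
          cases h2 : (cnt.getD n 0 == 2) with
          | true =>
              rw [if_pos rfl, Bool.and_true, if_pos (decide_eq_true hP), ih3, List.map_append]
              rfl
          | false =>
              rw [if_neg Bool.false_ne_true, Bool.and_false, if_neg Bool.false_ne_true,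
                  ih3, List.append_nil]
      · rw [if_neg hP]
        refine ⟨ih1, ?_, ?_⟩
        · intro j hj
          rw [ih2 j hj]
          refine if_congr ⟨fun h => ⟨Nat.lt_succ_of_lt h.1, h.2⟩, fun h => ⟨?_, h.2⟩⟩ rfl rfl
          rcases Nat.lt_succ_iff_lt_or_eq.mp h.1 with h1 | h1
          · exact h1
          · exact absurd h.2 (h1 ▸ hP)
        · rw [hfilter, if_neg (by simp [hP]), List.append_nil, ih3]

lemma pvClearRowStep_spec (x : List (List Int)) (k : Nat) (clc : List Bool)
    (ccnt : List Int) (C : Nat) :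
      (pvClearRowStep x C k ccnt clc).1.length = ccnt.length
      ∧ (∀ j, j < ccnt.length → (pvClearRowStep x C k ccnt clc).1.getD j 0
            = if j < C ∧ clc.getD j false = false ∧ 0 ≤ (x.getD k []).getD j 0
              then ccnt.getD j 0 - 1 else ccnt.getD j 0)
      ∧ (pvClearRowStep x C k ccnt clc).2
          = ((List.range C).filter
              (fun j => decide (clc.getD j false = false ∧ 0 ≤ (x.getD k []).getD j 0)
                        && (ccnt.getD j 0 == 2))).map (fun j => ((false, j) : Bool × Nat)) :=
  pvClearStep_spec_gen
    (fun j => clc.getD j false = false ∧ 0 ≤ (x.getD k []).getD j 0)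
    (fun j => ((false, j) : Bool × Nat)) C ccnt

lemma pvClearColStep_spec (x : List (List Int)) (k : Nat) (clr : List Bool)
    (rcnt : List Int) :
      (pvClearColStep x k rcnt clr).1.length = rcnt.length
      ∧ (∀ i, i < rcnt.length → (pvClearColStep x k rcnt clr).1.getD i 0
            = if i < x.length ∧ clr.getD i false = false ∧ 0 ≤ (x.getD i []).getD k 0
              then rcnt.getD i 0 - 1 else rcnt.getD i 0)
      ∧ (pvClearColStep x k rcnt clr).2
          = ((List.range x.length).filter
              (fun i => decide (clr.getD i false = false ∧ 0 ≤ (x.getD i []).getD k 0)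
                        && (rcnt.getD i 0 == 2))).map (fun i => ((true, i) : Bool × Nat)) :=
  pvClearStep_spec_gen
    (fun i => clr.getD i false = false ∧ 0 ≤ (x.getD i []).getD k 0)
    (fun i => ((true, i) : Bool × Nat)) x.length rcnt

-- marking a freshly cleared count-1 row first does not change the marked row set
lemma pv_contains_iff (l : List Nat) (a : Nat) : l.contains a = true ↔ a ∈ l := by
  simp

lemma pvMark_set_comm_row (x : List (List Int)) (clr clc : List Bool) (C k : Nat)
    (hlr : clr.length = x.length) (hk : k < x.length)
    (h0 : clr.getD k false = false) (h1 : pvAliveRowCnt x clc k C = 1) :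
    pvMark (clr.set k true) (pvNewRows x (clr.set k true) clc x.length C)
      = pvMark clr (pvNewRows x clr clc x.length C) := by
  have hb1 : ∀ i ∈ pvNewRows x (clr.set k true) clc x.length C, i < (clr.set k true).length := by
    intro i hi
    have := List.mem_range.mp (List.mem_of_mem_filter hi)
    simpa [hlr] using this
  have hb2 : ∀ i ∈ pvNewRows x clr clc x.length C, i < clr.length := by
    intro i hi
    have := List.mem_range.mp (List.mem_of_mem_filter hi)
    omega
  apply pv_list_ext_getD false
  · rw [pvMark_length, pvMark_length, List.length_set]
  · intro i hi
    rw [pvMark_getD _ _ _ hb1, pvMark_getD _ _ _ hb2]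
    by_cases hik : i = k
    · subst hik
      have hset : (clr.set i true).getD i false = true :=
        pv_getD_set_self _ _ _ (by omega)
      have hmem : i ∈ pvNewRows x clr clc x.length C := by
        unfold pvNewRows
        rw [List.mem_filter]
        refine ⟨List.mem_range.mpr hk, ?_⟩
        rw [h0, h1]
        rfl
      have hcont : (pvNewRows x clr clc x.length C).contains i = true :=
        (pv_contains_iff _ _).mpr hmem
      rw [hset, hcont, h0]
      rfl
    · have hset : (clr.set k true).getD i false = clr.getD i false :=
        pv_getD_set_ne _ _ _ hik
      have hmemiff : i ∈ pvNewRows x (clr.set k true) clc x.length C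
          ↔ i ∈ pvNewRows x clr clc x.length C := by
        unfold pvNewRows
        rw [List.mem_filter, List.mem_filter]
        rw [pv_getD_set_ne _ _ _ hik]
      have hcont : (pvNewRows x (clr.set k true) clc x.length C).contains i
          = (pvNewRows x clr clc x.length C).contains i := by
        rw [Bool.eq_iff_iff, pv_contains_iff, pv_contains_iff]
        exact hmemiff
      rw [hset, hcont]

lemma pvMark_set_comm_col (x : List (List Int)) (clr clc : List Bool) (C k : Nat)
    (hlc : clc.length = C) (hk : k < C)
    (h0 : clc.getD k false = false) (h1 : pvAliveColCnt x clr k x.length = 1) :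
    pvMark (clc.set k true) (pvNewCols x clr (clc.set k true) x.length C)
      = pvMark clc (pvNewCols x clr clc x.length C) := by
  have hb1 : ∀ j ∈ pvNewCols x clr (clc.set k true) x.length C, j < (clc.set k true).length := by
    intro j hj
    have := List.mem_range.mp (List.mem_of_mem_filter hj)
    simpa [hlc] using this
  have hb2 : ∀ j ∈ pvNewCols x clr clc x.length C, j < clc.length := by
    intro j hj
    have := List.mem_range.mp (List.mem_of_mem_filter hj)
    omega
  apply pv_list_ext_getD false
  · rw [pvMark_length, pvMark_length, List.length_set]
  · intro j hj
    rw [pvMark_getD _ _ _ hb1, pvMark_getD _ _ _ hb2]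
    by_cases hjk : j = k
    · subst hjk
      have hset : (clc.set j true).getD j false = true :=
        pv_getD_set_self _ _ _ (by omega)
      have hmem : j ∈ pvNewCols x clr clc x.length C := by
        unfold pvNewCols
        rw [List.mem_filter]
        refine ⟨List.mem_range.mpr hk, ?_⟩
        rw [h0, h1]
        rfl
      have hcont : (pvNewCols x clr clc x.length C).contains j = true :=
        (pv_contains_iff _ _).mpr hmem
      rw [hset, hcont, h0]
      rfl
    · have hset : (clc.set k true).getD j false = clc.getD j false :=
        pv_getD_set_ne _ _ _ hjk
      have hmemiff : j ∈ pvNewCols x clr (clc.set k true) x.length C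
          ↔ j ∈ pvNewCols x clr clc x.length C := by
        unfold pvNewCols
        rw [List.mem_filter, List.mem_filter]
        rw [pv_getD_set_ne _ _ _ hjk]
      have hcont : (pvNewCols x clr (clc.set k true) x.length C).contains j
          = (pvNewCols x clr clc x.length C).contains j := by
        rw [Bool.eq_iff_iff, pv_contains_iff, pv_contains_iff]
        exact hmemiff
      rw [hset, hcont]

-- single pop-step reductions
lemma pvPop_row_cleared (x : List (List Int)) (C F k : Nat) (rest : List (Bool × Nat))
    (rcnt ccnt : List Int) (clr clc : List Bool) (h : clr.getD k false = true) :
    pvPop x C (F + 1) ((true, k) :: rest) rcnt ccnt clr clc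
      = pvPop x C F rest rcnt ccnt clr clc := by
  have h' := h
  rw [List.getD_eq_getElem?_getD] at h'
  simp [pvPop, h']

lemma pvPop_row_skip (x : List (List Int)) (C F k : Nat) (rest : List (Bool × Nat))
    (rcnt ccnt : List Int) (clr clc : List Bool) (h0 : clr.getD k false = false)
    (h1 : (rcnt.getD k 0 == 1) = false) :
    pvPop x C (F + 1) ((true, k) :: rest) rcnt ccnt clr clc
      = pvPop x C F rest rcnt ccnt clr clc := by
  have h0' := h0
  have h1' := h1
  rw [List.getD_eq_getElem?_getD] at h0'
  rw [List.getD_eq_getElem?_getD] at h1'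
  simp [pvPop, h0', h1']

lemma pvPop_row_clear (x : List (List Int)) (C F k : Nat) (rest : List (Bool × Nat))
    (rcnt ccnt : List Int) (clr clc : List Bool) (h0 : clr.getD k false = false)
    (h1 : (rcnt.getD k 0 == 1) = true) :
    pvPop x C (F + 1) ((true, k) :: rest) rcnt ccnt clr clc
      = pvPop x C F (rest ++ (pvClearRowStep x C k ccnt clc).2) rcnt
          (pvClearRowStep x C k ccnt clc).1 (clr.set k true) clc := by
  have h0' := h0
  have h1' := h1
  rw [List.getD_eq_getElem?_getD] at h0'
  rw [List.getD_eq_getElem?_getD] at h1'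
  simp [pvPop, h0', h1']

lemma pvPop_col_cleared (x : List (List Int)) (C F k : Nat) (rest : List (Bool × Nat))
    (rcnt ccnt : List Int) (clr clc : List Bool) (h : clc.getD k false = true) :
    pvPop x C (F + 1) ((false, k) :: rest) rcnt ccnt clr clc
      = pvPop x C F rest rcnt ccnt clr clc := by
  have h' := h
  rw [List.getD_eq_getElem?_getD] at h'
  simp [pvPop, h']

lemma pvPop_col_skip (x : List (List Int)) (C F k : Nat) (rest : List (Bool × Nat))
    (rcnt ccnt : List Int) (clr clc : List Bool) (h0 : clc.getD k false = false)
    (h1 : (ccnt.getD k 0 == 1) = false) :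
    pvPop x C (F + 1) ((false, k) :: rest) rcnt ccnt clr clc
      = pvPop x C F rest rcnt ccnt clr clc := by
  have h0' := h0
  have h1' := h1
  rw [List.getD_eq_getElem?_getD] at h0'
  rw [List.getD_eq_getElem?_getD] at h1'
  simp [pvPop, h0', h1']

lemma pvPop_col_clear (x : List (List Int)) (C F k : Nat) (rest : List (Bool × Nat))
    (rcnt ccnt : List Int) (clr clc : List Bool) (h0 : clc.getD k false = false)
    (h1 : (ccnt.getD k 0 == 1) = true) :
    pvPop x C (F + 1) ((false, k) :: rest) rcnt ccnt clr clc
      = pvPop x C F (rest ++ (pvClearColStep x k rcnt clr).2)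
          (pvClearColStep x k rcnt clr).1 ccnt clr (clc.set k true) := by
  have h0' := h0
  have h1' := h1
  rw [List.getD_eq_getElem?_getD] at h0'
  rw [List.getD_eq_getElem?_getD] at h1'
  simp [pvPop, h0', h1']

-- processing a whole block of queued rows
lemma pvRowBlock (x : List (List Int)) (C : Nat) :
    ∀ (QR : List Nat) (QC : List Nat) (F : Nat) (rcnt ccnt : List Int) (clr clc : List Bool),
    clr.length = x.length → clc.length = C → rcnt.length = x.length → ccnt.length = C →
    (∀ i, i < x.length → clr.getD i false = false →
        rcnt.getD i 0 = (pvAliveRowCnt x clc i C : Int)) →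
    (∀ j, j < C → clc.getD j false = false →
        ccnt.getD j 0 = (pvAliveColCnt x clr j x.length : Int)) →
    (∀ i, i < x.length → clr.getD i false = false → pvAliveRowCnt x clc i C = 1 → i ∈ QR) →
    (∀ j, j < C → clc.getD j false = false → pvAliveColCnt x clr j x.length = 1 → j ∈ QC) →
    QR.length ≤ F →
    ∃ E : List Nat, ∃ ccnt' : List Int,
      pvPop x C F
          (QR.map (fun i => ((true, i) : Bool × Nat))
            ++ QC.map (fun j => ((false, j) : Bool × Nat))) rcnt ccnt clr clc
        = pvPop x C (F - QR.length)
            ((QC ++ E).map (fun j => ((false, j) : Bool × Nat))) rcnt ccnt'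
            (pvMark clr (pvNewRows x clr clc x.length C)) clc
      ∧ ccnt'.length = C
      ∧ (∀ j, j < C → clc.getD j false = false →
            ccnt'.getD j 0
              = (pvAliveColCnt x (pvMark clr (pvNewRows x clr clc x.length C)) j x.length : Int))
      ∧ (∀ j ∈ E, j < C)
      ∧ (∀ j, j < C → clc.getD j false = false →
            pvAliveColCnt x (pvMark clr (pvNewRows x clr clc x.length C)) j x.length = 1 →
            j ∈ QC ++ E)
      ∧ E.length + C * pvUnc (pvMark clr (pvNewRows x clr clc x.length C)) ≤ C * pvUnc clr := by
  intro QR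
  induction QR with
  | nil =>
      intro QC F rcnt ccnt clr clc hlr hlc hrc hcc hBr hBc hDr hDc hF
      have hnr : pvNewRows x clr clc x.length C = [] := by
        rw [List.eq_nil_iff_forall_not_mem]
        intro i hi
        have h1 := List.mem_range.mp (List.mem_of_mem_filter hi)
        have h2 := (List.mem_filter.mp hi).2
        simp only [Bool.and_eq_true, Bool.not_eq_true', beq_iff_eq] at h2
        exact absurd (hDr i h1 h2.1 h2.2) (List.not_mem_nil)
      rw [hnr]
      refine ⟨[], ccnt, ?_, hcc, ?_, ?_, ?_, ?_⟩
      · simp only [List.map_nil, List.nil_append, List.append_nil, List.length_nil,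
          Nat.sub_zero]
        rfl
      · intro j hj hclc
        exact hBc j hj hclc
      · intro j hj
        cases hj
      · intro j hj hclc hacc
        rw [List.append_nil]
        exact hDc j hj hclc hacc
      · simp [pvMark]
  | cons k Q' ih =>
      intro QC F rcnt ccnt clr clc hlr hlc hrc hcc hBr hBc hDr hDc hF
      cases F with
      | zero => simp at hF
      | succ F =>
        have hF' : Q'.length ≤ F := by
          simp only [List.length_cons] at hF
          omega
        have hqshape : (k :: Q').map (fun i => ((true, i) : Bool × Nat))
            ++ QC.map (fun j => ((false, j) : Bool × Nat))
            = (true, k) :: (Q'.map (fun i => ((true, i) : Bool × Nat))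
                ++ QC.map (fun j => ((false, j) : Bool × Nat))) := by
          simp
        have hfuel : (F + 1) - (k :: Q').length = F - Q'.length := by
          simp only [List.length_cons]
          omega
        cases hclrk : clr.getD k false with
        | true =>
            have hDr' : ∀ i, i < x.length → clr.getD i false = false →
                pvAliveRowCnt x clc i C = 1 → i ∈ Q' := by
              intro i hi h0 h1
              rcases List.mem_cons.mp (hDr i hi h0 h1) with he | he
              · exact absurd hclrk (by rw [← he, h0]; exact Bool.false_ne_true)
              · exact he
            obtain ⟨E, ccnt', heq, hl, hBc', hEb, hDc', hEbound⟩ :=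
              ih QC F rcnt ccnt clr clc hlr hlc hrc hcc hBr hBc hDr' hDc hF'
            refine ⟨E, ccnt', ?_, hl, hBc', hEb, hDc', hEbound⟩
            rw [hqshape, pvPop_row_cleared x C F k _ rcnt ccnt clr clc hclrk, heq, hfuel]
        | false =>
            cases hcnt1 : (rcnt.getD k 0 == 1) with
            | false =>
                have hDr' : ∀ i, i < x.length → clr.getD i false = false →
                    pvAliveRowCnt x clc i C = 1 → i ∈ Q' := by
                  intro i hi h0 h1
                  rcases List.mem_cons.mp (hDr i hi h0 h1) with he | he
                  · subst he
                    rw [hBr i hi h0, h1] at hcnt1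
                    simp at hcnt1
                  · exact he
                obtain ⟨E, ccnt', heq, hl, hBc', hEb, hDc', hEbound⟩ :=
                  ih QC F rcnt ccnt clr clc hlr hlc hrc hcc hBr hBc hDr' hDc hF'
                refine ⟨E, ccnt', ?_, hl, hBc', hEb, hDc', hEbound⟩
                rw [hqshape, pvPop_row_skip x C F k _ rcnt ccnt clr clc hclrk hcnt1, heq, hfuel]
            | true =>
                have hkR : k < x.length := by
                  by_contra hh
                  rw [pv_getD_ge _ _ (by omega : rcnt.length ≤ k)] at hcnt1
                  exact absurd hcnt1 (by decide)
                have hkclr : k < clr.length := by omega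
                have harck : pvAliveRowCnt x clc k C = 1 := by
                  have hb := hBr k hkR hclrk
                  rw [hb] at hcnt1
                  have := beq_iff_eq.mp hcnt1
                  exact_mod_cast this
                obtain ⟨hs1len, hs1get, hs2⟩ := pvClearRowStep_spec x k clc ccnt C
                have hmm := pvMark_set_comm_row x clr clc C k hlr hkR hclrk harck
                have hlr' : (clr.set k true).length = x.length := by
                  rw [List.length_set]; exact hlr
                have hcc' : (pvClearRowStep x C k ccnt clc).1.length = C := by
                  rw [hs1len]; exact hcc
                have hBr' : ∀ i, i < x.length → (clr.set k true).getD i false = false →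
                    rcnt.getD i 0 = (pvAliveRowCnt x clc i C : Int) := by
                  intro i hi h0
                  by_cases hik : i = k
                  · subst hik
                    rw [pv_getD_set_self _ _ _ hkclr] at h0
                    cases h0
                  · rw [pv_getD_set_ne _ _ _ hik] at h0
                    exact hBr i hi h0
                have hBc' : ∀ j, j < C → clc.getD j false = false →
                    (pvClearRowStep x C k ccnt clc).1.getD j 0
                      = (pvAliveColCnt x (clr.set k true) j x.length : Int) := by
                  intro j hj hclc
                  rw [hs1get j (by omega)]
                  have hacc := pvAcc_set x clr j k hlr hkR hclrk
                  by_cases hcell : 0 ≤ (x.getD k []).getD j 0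
                  · rw [if_pos ⟨hj, hclc, hcell⟩, hBc j hj hclc]
                    rw [if_pos hcell] at hacc
                    rw [hacc]
                    push_cast
                    ring
                  · rw [if_neg (by rintro ⟨-, -, hc⟩; exact hcell hc), hBc j hj hclc]
                    rw [if_neg hcell, Nat.add_zero] at hacc
                    rw [hacc]
                have hDr' : ∀ i, i < x.length → (clr.set k true).getD i false = false →
                    pvAliveRowCnt x clc i C = 1 → i ∈ Q' := by
                  intro i hi h0 h1
                  by_cases hik : i = k
                  · subst hik
                    rw [pv_getD_set_self _ _ _ hkclr] at h0
                    cases h0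
                  · rw [pv_getD_set_ne _ _ _ hik] at h0
                    rcases List.mem_cons.mp (hDr i hi h0 h1) with he | he
                    · exact absurd he hik
                    · exact he
                have hDc' : ∀ j, j < C → clc.getD j false = false →
                    pvAliveColCnt x (clr.set k true) j x.length = 1 →
                    j ∈ QC ++ ((List.range C).filter
                      (fun j => decide (clc.getD j false = false ∧ 0 ≤ (x.getD k []).getD j 0)
                        && (ccnt.getD j 0 == 2))) := by
                  intro j hj hclc hacc1
                  have haccs := pvAcc_set x clr j k hlr hkR hclrk
                  by_cases hcell : 0 ≤ (x.getD k []).getD j 0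
                  · rw [if_pos hcell, hacc1] at haccs
                    refine List.mem_append_right _ ?_
                    rw [List.mem_filter]
                    refine ⟨List.mem_range.mpr hj, ?_⟩
                    rw [decide_eq_true ⟨hclc, hcell⟩, Bool.true_and, beq_iff_eq,
                        hBc j hj hclc, haccs]
                    norm_num
                  · rw [if_neg hcell, Nat.add_zero] at haccs
                    exact List.mem_append_left _ (hDc j hj hclc (haccs.symm ▸ hacc1))
                obtain ⟨E', ccnt', heq, hl, hBc'', hEb', hDc'', hEbound'⟩ :=
                  ih (QC ++ ((List.range C).filter
                      (fun j => decide (clc.getD j false = false ∧ 0 ≤ (x.getD k []).getD j 0)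
                        && (ccnt.getD j 0 == 2)))) F rcnt
                    (pvClearRowStep x C k ccnt clc).1 (clr.set k true) clc
                    hlr' hlc hrc hcc' hBr' hBc' hDr' hDc' hF'
                refine ⟨((List.range C).filter
                    (fun j => decide (clc.getD j false = false ∧ 0 ≤ (x.getD k []).getD j 0)
                      && (ccnt.getD j 0 == 2))) ++ E', ccnt', ?_, hl, ?_, ?_, ?_, ?_⟩
                · rw [hqshape, pvPop_row_clear x C F k _ rcnt ccnt clr clc hclrk hcnt1, hs2]
                  rw [List.append_assoc, ← List.map_append]
                  rw [heq, hfuel, hmm, List.append_assoc]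
                · intro j hj hclc
                  rw [← hmm]
                  exact hBc'' j hj hclc
                · intro j hj
                  rcases List.mem_append.mp hj with hm | hm
                  · exact List.mem_range.mp (List.mem_of_mem_filter hm)
                  · exact hEb' j hm
                · intro j hj hclc hacc1
                  have := hDc'' j hj hclc (by rw [hmm]; exact hacc1)
                  rwa [List.append_assoc] at this
                · rw [List.length_append]
                  have h1 : ((List.range C).filter
                      (fun j => decide (clc.getD j false = false ∧ 0 ≤ (x.getD k []).getD j 0)
                        && (ccnt.getD j 0 == 2))).length ≤ C := by
                    calc _ ≤ (List.range C).length := List.length_filter_le _ _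
                      _ = C := List.length_range
                  rw [hmm] at hEbound'
                  have h2 : pvUnc (clr.set k true) + 1 = pvUnc clr :=
                    pvUnc_set_eq clr k hkclr hclrk
                  have h3 : C * pvUnc clr = C * pvUnc (clr.set k true) + C := by
                    rw [← h2, Nat.mul_succ]
                  omega

-- processing a whole block of queued columns
lemma pvColBlock (x : List (List Int)) (C : Nat) :
    ∀ (QC : List Nat) (QR : List Nat) (F : Nat) (rcnt ccnt : List Int) (clr clc : List Bool),
    clr.length = x.length → clc.length = C → rcnt.length = x.length → ccnt.length = C →
    (∀ i, i < x.length → clr.getD i false = false →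
        rcnt.getD i 0 = (pvAliveRowCnt x clc i C : Int)) →
    (∀ j, j < C → clc.getD j false = false →
        ccnt.getD j 0 = (pvAliveColCnt x clr j x.length : Int)) →
    (∀ j, j < C → clc.getD j false = false → pvAliveColCnt x clr j x.length = 1 → j ∈ QC) →
    (∀ i, i < x.length → clr.getD i false = false → pvAliveRowCnt x clc i C = 1 → i ∈ QR) →
    QC.length ≤ F →
    ∃ E : List Nat, ∃ rcnt' : List Int,
      pvPop x C F
          (QC.map (fun j => ((false, j) : Bool × Nat))
            ++ QR.map (fun i => ((true, i) : Bool × Nat))) rcnt ccnt clr clc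
        = pvPop x C (F - QC.length)
            ((QR ++ E).map (fun i => ((true, i) : Bool × Nat))) rcnt' ccnt clr
            (pvMark clc (pvNewCols x clr clc x.length C))
      ∧ rcnt'.length = x.length
      ∧ (∀ i, i < x.length → clr.getD i false = false →
            rcnt'.getD i 0
              = (pvAliveRowCnt x (pvMark clc (pvNewCols x clr clc x.length C)) i C : Int))
      ∧ (∀ i ∈ E, i < x.length)
      ∧ (∀ i, i < x.length → clr.getD i false = false →
            pvAliveRowCnt x (pvMark clc (pvNewCols x clr clc x.length C)) i C = 1 →
            i ∈ QR ++ E)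
      ∧ E.length + x.length * pvUnc (pvMark clc (pvNewCols x clr clc x.length C))
          ≤ x.length * pvUnc clc := by
  intro QC
  induction QC with
  | nil =>
      intro QR F rcnt ccnt clr clc hlr hlc hrc hcc hBr hBc hDc hDr hF
      have hnc : pvNewCols x clr clc x.length C = [] := by
        rw [List.eq_nil_iff_forall_not_mem]
        intro j hj
        have h1 := List.mem_range.mp (List.mem_of_mem_filter hj)
        have h2 := (List.mem_filter.mp hj).2
        simp only [Bool.and_eq_true, Bool.not_eq_true', beq_iff_eq] at h2
        exact absurd (hDc j h1 h2.1 h2.2) (List.not_mem_nil)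
      rw [hnc]
      refine ⟨[], rcnt, ?_, hrc, ?_, ?_, ?_, ?_⟩
      · simp only [List.map_nil, List.nil_append, List.append_nil, List.length_nil,
          Nat.sub_zero]
        rfl
      · intro i hi hclr
        exact hBr i hi hclr
      · intro i hi
        cases hi
      · intro i hi hclr harc
        rw [List.append_nil]
        exact hDr i hi hclr harc
      · simp [pvMark]
  | cons k Q' ih =>
      intro QR F rcnt ccnt clr clc hlr hlc hrc hcc hBr hBc hDc hDr hF
      cases F with
      | zero => simp at hF
      | succ F =>
        have hF' : Q'.length ≤ F := by
          simp only [List.length_cons] at hF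
          omega
        have hqshape : (k :: Q').map (fun j => ((false, j) : Bool × Nat))
            ++ QR.map (fun i => ((true, i) : Bool × Nat))
            = (false, k) :: (Q'.map (fun j => ((false, j) : Bool × Nat))
                ++ QR.map (fun i => ((true, i) : Bool × Nat))) := by
          simp
        have hfuel : (F + 1) - (k :: Q').length = F - Q'.length := by
          simp only [List.length_cons]
          omega
        cases hclck : clc.getD k false with
        | true =>
            have hDc' : ∀ j, j < C → clc.getD j false = false →
                pvAliveColCnt x clr j x.length = 1 → j ∈ Q' := by
              intro j hj h0 h1
              rcases List.mem_cons.mp (hDc j hj h0 h1) with he | he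
              · exact absurd hclck (by rw [← he, h0]; exact Bool.false_ne_true)
              · exact he
            obtain ⟨E, rcnt', heq, hl, hBr', hEb, hDr', hEbound⟩ :=
              ih QR F rcnt ccnt clr clc hlr hlc hrc hcc hBr hBc hDc' hDr hF'
            refine ⟨E, rcnt', ?_, hl, hBr', hEb, hDr', hEbound⟩
            rw [hqshape, pvPop_col_cleared x C F k _ rcnt ccnt clr clc hclck, heq, hfuel]
        | false =>
            cases hcnt1 : (ccnt.getD k 0 == 1) with
            | false =>
                have hDc' : ∀ j, j < C → clc.getD j false = false →
                    pvAliveColCnt x clr j x.length = 1 → j ∈ Q' := by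
                  intro j hj h0 h1
                  rcases List.mem_cons.mp (hDc j hj h0 h1) with he | he
                  · subst he
                    rw [hBc j hj h0, h1] at hcnt1
                    simp at hcnt1
                  · exact he
                obtain ⟨E, rcnt', heq, hl, hBr', hEb, hDr', hEbound⟩ :=
                  ih QR F rcnt ccnt clr clc hlr hlc hrc hcc hBr hBc hDc' hDr hF'
                refine ⟨E, rcnt', ?_, hl, hBr', hEb, hDr', hEbound⟩
                rw [hqshape, pvPop_col_skip x C F k _ rcnt ccnt clr clc hclck hcnt1, heq, hfuel]
            | true =>
                have hkC : k < C := by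
                  by_contra hh
                  rw [pv_getD_ge _ _ (by omega : ccnt.length ≤ k)] at hcnt1
                  exact absurd hcnt1 (by decide)
                have hkclc : k < clc.length := by omega
                have hacck : pvAliveColCnt x clr k x.length = 1 := by
                  have hb := hBc k hkC hclck
                  rw [hb] at hcnt1
                  have := beq_iff_eq.mp hcnt1
                  exact_mod_cast this
                obtain ⟨hs1len, hs1get, hs2⟩ := pvClearColStep_spec x k clr rcnt
                have hmm := pvMark_set_comm_col x clr clc C k hlc hkC hclck hacck
                have hlc' : (clc.set k true).length = C := by
                  rw [List.length_set]; exact hlc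
                have hrc' : (pvClearColStep x k rcnt clr).1.length = x.length := by
                  rw [hs1len]; exact hrc
                have hBc' : ∀ j, j < C → (clc.set k true).getD j false = false →
                    ccnt.getD j 0 = (pvAliveColCnt x clr j x.length : Int) := by
                  intro j hj h0
                  by_cases hjk : j = k
                  · subst hjk
                    rw [pv_getD_set_self _ _ _ hkclc] at h0
                    cases h0
                  · rw [pv_getD_set_ne _ _ _ hjk] at h0
                    exact hBc j hj h0
                have hBr' : ∀ i, i < x.length → clr.getD i false = false →
                    (pvClearColStep x k rcnt clr).1.getD i 0
                      = (pvAliveRowCnt x (clc.set k true) i C : Int) := by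
                  intro i hi hclr
                  rw [hs1get i (by omega)]
                  have harc := pvArc_set x clc i k C hkC hclck hlc
                  by_cases hcell : 0 ≤ (x.getD i []).getD k 0
                  · rw [if_pos ⟨hi, hclr, hcell⟩, hBr i hi hclr]
                    rw [if_pos hcell] at harc
                    rw [harc]
                    push_cast
                    ring
                  · rw [if_neg (by rintro ⟨-, -, hc⟩; exact hcell hc), hBr i hi hclr]
                    rw [if_neg hcell, Nat.add_zero] at harc
                    rw [harc]
                have hDc' : ∀ j, j < C → (clc.set k true).getD j false = false →
                    pvAliveColCnt x clr j x.length = 1 → j ∈ Q' := by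
                  intro j hj h0 h1
                  by_cases hjk : j = k
                  · subst hjk
                    rw [pv_getD_set_self _ _ _ hkclc] at h0
                    cases h0
                  · rw [pv_getD_set_ne _ _ _ hjk] at h0
                    rcases List.mem_cons.mp (hDc j hj h0 h1) with he | he
                    · exact absurd he hjk
                    · exact he
                have hDr' : ∀ i, i < x.length → clr.getD i false = false →
                    pvAliveRowCnt x (clc.set k true) i C = 1 →
                    i ∈ QR ++ ((List.range x.length).filter
                      (fun i => decide (clr.getD i false = false ∧ 0 ≤ (x.getD i []).getD k 0)
                        && (rcnt.getD i 0 == 2))) := by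
                  intro i hi hclr harc1
                  have harcs := pvArc_set x clc i k C hkC hclck hlc
                  by_cases hcell : 0 ≤ (x.getD i []).getD k 0
                  · rw [if_pos hcell, harc1] at harcs
                    refine List.mem_append_right _ ?_
                    rw [List.mem_filter]
                    refine ⟨List.mem_range.mpr hi, ?_⟩
                    rw [decide_eq_true ⟨hclr, hcell⟩, Bool.true_and, beq_iff_eq,
                        hBr i hi hclr, harcs]
                    norm_num
                  · rw [if_neg hcell, Nat.add_zero] at harcs
                    exact List.mem_append_left _ (hDr i hi hclr (harcs.symm ▸ harc1))
                obtain ⟨E', rcnt', heq, hl, hBr'', hEb', hDr'', hEbound'⟩ :=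
                  ih (QR ++ ((List.range x.length).filter
                      (fun i => decide (clr.getD i false = false ∧ 0 ≤ (x.getD i []).getD k 0)
                        && (rcnt.getD i 0 == 2)))) F
                    (pvClearColStep x k rcnt clr).1 ccnt clr (clc.set k true)
                    hlr hlc' hrc' hcc hBr' hBc' hDc' hDr' hF'
                refine ⟨((List.range x.length).filter
                    (fun i => decide (clr.getD i false = false ∧ 0 ≤ (x.getD i []).getD k 0)
                      && (rcnt.getD i 0 == 2))) ++ E', rcnt', ?_, hl, ?_, ?_, ?_, ?_⟩
                · rw [hqshape, pvPop_col_clear x C F k _ rcnt ccnt clr clc hclck hcnt1, hs2]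
                  rw [List.append_assoc, ← List.map_append]
                  rw [heq, hfuel, hmm, List.append_assoc]
                · intro i hi hclr
                  rw [← hmm]
                  exact hBr'' i hi hclr
                · intro i hi
                  rcases List.mem_append.mp hi with hm | hm
                  · exact List.mem_range.mp (List.mem_of_mem_filter hm)
                  · exact hEb' i hm
                · intro i hi hclr harc1
                  have := hDr'' i hi hclr (by rw [hmm]; exact harc1)
                  rwa [List.append_assoc] at this
                · rw [List.length_append]
                  have h1 : ((List.range x.length).filter
                      (fun i => decide (clr.getD i false = false ∧ 0 ≤ (x.getD i []).getD k 0)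
                        && (rcnt.getD i 0 == 2))).length ≤ x.length := by
                    calc _ ≤ (List.range x.length).length := List.length_filter_le _ _
                      _ = x.length := List.length_range
                  rw [hmm] at hEbound'
                  have h2 : pvUnc (clc.set k true) + 1 = pvUnc clc :=
                    pvUnc_set_eq clc k hkclc hclck
                  have h3 : x.length * pvUnc clc = x.length * pvUnc (clc.set k true) + x.length := by
                    rw [← h2, Nat.mul_succ]
                  omega

lemma pvMark_nil (l : List Bool) : pvMark l [] = l := rfl

lemma pvNewRows_nonempty_unc (x : List (List Int)) (clr clc : List Bool) (C : Nat)
    (hlr : clr.length = x.length) (hne : pvNewRows x clr clc x.length C ≠ []) :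
    pvUnc (pvMark clr (pvNewRows x clr clc x.length C)) < pvUnc clr := by
  cases hl : pvNewRows x clr clc x.length C with
  | nil => exact absurd hl hne
  | cons a t =>
      have ha : a ∈ pvNewRows x clr clc x.length C := by
        rw [hl]; exact List.mem_cons_self
      have h1 := List.mem_range.mp (List.mem_of_mem_filter ha)
      have h2 := (List.mem_filter.mp ha).2
      simp only [Bool.and_eq_true, Bool.not_eq_true'] at h2
      exact pvUnc_mark_lt clr a t (by omega) h2.1

lemma pvNewCols_nonempty_unc (x : List (List Int)) (clr clc : List Bool) (C : Nat)
    (hlc : clc.length = C) (hne : pvNewCols x clr clc x.length C ≠ []) :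
    pvUnc (pvMark clc (pvNewCols x clr clc x.length C)) < pvUnc clc := by
  cases hl : pvNewCols x clr clc x.length C with
  | nil => exact absurd hl hne
  | cons a t =>
      have ha : a ∈ pvNewCols x clr clc x.length C := by
        rw [hl]; exact List.mem_cons_self
      have h1 := List.mem_range.mp (List.mem_of_mem_filter ha)
      have h2 := (List.mem_filter.mp ha).2
      simp only [Bool.and_eq_true, Bool.not_eq_true'] at h2
      exact pvUnc_mark_lt clc a t (by omega) h2.1

-- one round of the worklist = one iteration of the round loop
lemma pvMainSimStep (x : List (List Int)) (C : Nat) (m : Nat)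
    (ih : ∀ (QR QC : List Nat) (F : Nat) (rcnt ccnt : List Int) (clr clc : List Bool),
      clr.length = x.length → clc.length = C → rcnt.length = x.length → ccnt.length = C →
      (∀ i, i < x.length → clr.getD i false = false →
          rcnt.getD i 0 = (pvAliveRowCnt x clc i C : Int)) →
      (∀ j, j < C → clc.getD j false = false →
          ccnt.getD j 0 = (pvAliveColCnt x clr j x.length : Int)) →
      (∀ i, i < x.length → clr.getD i false = false → pvAliveRowCnt x clc i C = 1 → i ∈ QR) →
      (∀ j, j < C → clc.getD j false = false → pvAliveColCnt x clr j x.length = 1 → j ∈ QC) →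
      pvUnc clr + pvUnc clc < m →
      QR.length + QC.length + (x.length + C + 1) * (pvUnc clr + pvUnc clc) ≤ F →
      pvPop x C F
          (QR.map (fun i => ((true, i) : Bool × Nat))
            ++ QC.map (fun j => ((false, j) : Bool × Nat))) rcnt ccnt clr clc
        = pvLoopB x x.length C m clr clc) :
    ∀ (QR QC : List Nat) (F : Nat) (rcnt ccnt : List Int) (clr clc : List Bool),
    clr.length = x.length → clc.length = C → rcnt.length = x.length → ccnt.length = C →
    (∀ i, i < x.length → clr.getD i false = false →
        rcnt.getD i 0 = (pvAliveRowCnt x clc i C : Int)) →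
    (∀ j, j < C → clc.getD j false = false →
        ccnt.getD j 0 = (pvAliveColCnt x clr j x.length : Int)) →
    (∀ i, i < x.length → clr.getD i false = false → pvAliveRowCnt x clc i C = 1 → i ∈ QR) →
    (∀ j, j < C → clc.getD j false = false → pvAliveColCnt x clr j x.length = 1 → j ∈ QC) →
    pvUnc clr + pvUnc clc ≤ m →
    QR.length + QC.length + (x.length + C + 1) * (pvUnc clr + pvUnc clc) ≤ F →
    pvPop x C F
        (QR.map (fun i => ((true, i) : Bool × Nat))
          ++ QC.map (fun j => ((false, j) : Bool × Nat))) rcnt ccnt clr clc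
      = pvLoopB x x.length C (m + 1) clr clc := by
  intro QR QC F rcnt ccnt clr clc hlr hlc hrc hcc hBr hBc hDr hDc hm hFuel
  have hnrb : ∀ i ∈ pvNewRows x clr clc x.length C, i < clr.length := by
    intro i hi
    have := List.mem_range.mp (List.mem_of_mem_filter hi)
    omega
  have hncb : ∀ j ∈ pvNewCols x (pvMark clr (pvNewRows x clr clc x.length C)) clc x.length C,
      j < clc.length := by
    intro j hj
    have := List.mem_range.mp (List.mem_of_mem_filter hj)
    omega
  obtain ⟨E1, ccnt', heq1, hcc', hBc', hE1b, hDc', hE1bound⟩ :=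
    pvRowBlock x C QR QC F rcnt ccnt clr clc hlr hlc hrc hcc hBr hBc hDr hDc (by omega)
  have hlr2 : (pvMark clr (pvNewRows x clr clc x.length C)).length = x.length := by
    rw [pvMark_length]; exact hlr
  have hBr2 : ∀ i, i < x.length →
      (pvMark clr (pvNewRows x clr clc x.length C)).getD i false = false →
      rcnt.getD i 0 = (pvAliveRowCnt x clc i C : Int) := by
    intro i hi h0
    rw [pvMark_getD _ _ _ hnrb] at h0
    exact hBr i hi (by
      cases hcl : clr.getD i false
      · rfl
      · rw [hcl] at h0; cases h0)
  have hDrEmpty : ∀ i, i < x.length →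
      (pvMark clr (pvNewRows x clr clc x.length C)).getD i false = false →
      pvAliveRowCnt x clc i C = 1 → i ∈ ([] : List Nat) := by
    intro i hi h0 h1
    rw [pvMark_getD _ _ _ hnrb] at h0
    have h0' := Bool.or_eq_false_iff.mp h0
    have hmem : i ∈ pvNewRows x clr clc x.length C := by
      unfold pvNewRows
      rw [List.mem_filter]
      refine ⟨List.mem_range.mpr hi, ?_⟩
      rw [h0'.1, h1]
      rfl
    have := (pv_contains_iff _ _).mpr hmem
    rw [this] at h0
    simp at h0
  have hE1len : E1.length ≤ C * pvUnc clr := by omega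
  have hCu : C * pvUnc clr ≤ (x.length + C + 1) * (pvUnc clr + pvUnc clc) :=
    Nat.mul_le_mul (by omega) (by omega)
  obtain ⟨E2, rcnt', heq2, hrc', hBr'', hE2b, hDr'', hE2bound⟩ :=
    pvColBlock x C (QC ++ E1) [] (F - QR.length) rcnt ccnt'
      (pvMark clr (pvNewRows x clr clc x.length C)) clc
      hlr2 hlc hrc hcc' hBr2 hBc' hDc' hDrEmpty
      (by rw [List.length_append]; omega)
  have hLB : pvLoopB x x.length C (m + 1) clr clc
      = if (pvNewRows x clr clc x.length C).isEmpty
          && (pvNewCols x (pvMark clr (pvNewRows x clr clc x.length C)) clc x.length C).isEmpty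
        then (pvMark clr (pvNewRows x clr clc x.length C),
              pvMark clc (pvNewCols x (pvMark clr (pvNewRows x clr clc x.length C)) clc x.length C))
        else pvLoopB x x.length C m
          (pvMark clr (pvNewRows x clr clc x.length C))
          (pvMark clc (pvNewCols x (pvMark clr (pvNewRows x clr clc x.length C)) clc x.length C)) := by
    show (let nr0 := pvNewRows x clr clc x.length C
          let cr0 := pvMark clr nr0
          let nc0 := pvNewCols x cr0 clc x.length C
          let cc0 := pvMark clc nc0
          if nr0.isEmpty && nc0.isEmpty then (cr0, cc0)
          else pvLoopB x x.length C m cr0 cc0) = _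
    rfl
  by_cases hfix : pvNewRows x clr clc x.length C = []
      ∧ pvNewCols x (pvMark clr (pvNewRows x clr clc x.length C)) clc x.length C = []
  · obtain ⟨hnr, hnc⟩ := hfix
    rw [hnr, pvMark_nil] at heq1 hE1bound hnc
    rw [hnr, pvMark_nil] at heq2 hE2bound
    rw [hnc, pvMark_nil] at heq2 hE2bound
    have hE2nil : E2 = [] := by
      have : E2.length = 0 := by omega
      exact List.eq_nil_of_length_eq_zero this
    rw [hE2nil] at heq2
    simp only [List.map_nil, List.append_nil, List.nil_append] at heq2
    rw [heq1, heq2, pvPop_nil, hLB, hnr, pvMark_nil, hnc]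
    rfl
  · have hne : pvNewRows x clr clc x.length C ≠ []
        ∨ pvNewCols x (pvMark clr (pvNewRows x clr clc x.length C)) clc x.length C ≠ [] := by
      by_cases h1 : pvNewRows x clr clc x.length C = []
      · right
        intro h2
        exact hfix ⟨h1, h2⟩
      · left
        exact h1
    have hur : pvUnc (pvMark clr (pvNewRows x clr clc x.length C)) ≤ pvUnc clr :=
      pvUnc_mark_le _ _
    have huc : pvUnc (pvMark clc
        (pvNewCols x (pvMark clr (pvNewRows x clr clc x.length C)) clc x.length C)) ≤ pvUnc clc :=
      pvUnc_mark_le _ _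
    have hlt : pvUnc (pvMark clr (pvNewRows x clr clc x.length C))
        + pvUnc (pvMark clc
            (pvNewCols x (pvMark clr (pvNewRows x clr clc x.length C)) clc x.length C))
        < pvUnc clr + pvUnc clc := by
      rcases hne with h | h
      · have := pvNewRows_nonempty_unc x clr clc C hlr h
        omega
      · have := pvNewCols_nonempty_unc x
          (pvMark clr (pvNewRows x clr clc x.length C)) clc C hlc h
        omega
    have hBc3 : ∀ j, j < C →
        (pvMark clc (pvNewCols x (pvMark clr (pvNewRows x clr clc x.length C)) clc x.length C)).getD j false = false →
        ccnt'.getD j 0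
          = (pvAliveColCnt x (pvMark clr (pvNewRows x clr clc x.length C)) j x.length : Int) := by
      intro j hj h0
      rw [pvMark_getD _ _ _ hncb] at h0
      exact hBc' j hj (by
        cases hcl : clc.getD j false
        · rfl
        · rw [hcl] at h0; cases h0)
    have hDr3 : ∀ i, i < x.length →
        (pvMark clr (pvNewRows x clr clc x.length C)).getD i false = false →
        pvAliveRowCnt x
          (pvMark clc (pvNewCols x (pvMark clr (pvNewRows x clr clc x.length C)) clc x.length C)) i C = 1 →
        i ∈ E2 := by
      intro i hi h0 h1
      have := hDr'' i hi h0 h1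
      rwa [List.nil_append] at this
    have hDc3 : ∀ j, j < C →
        (pvMark clc (pvNewCols x (pvMark clr (pvNewRows x clr clc x.length C)) clc x.length C)).getD j false = false →
        pvAliveColCnt x (pvMark clr (pvNewRows x clr clc x.length C)) j x.length = 1 →
        j ∈ ([] : List Nat) := by
      intro j hj h0 h1
      rw [pvMark_getD _ _ _ hncb] at h0
      have h0' := Bool.or_eq_false_iff.mp h0
      have hmem : j ∈ pvNewCols x (pvMark clr (pvNewRows x clr clc x.length C)) clc x.length C := by
        unfold pvNewCols
        rw [List.mem_filter]
        refine ⟨List.mem_range.mpr hj, ?_⟩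
        rw [h0'.1, h1]
        rfl
      have := (pv_contains_iff _ _).mpr hmem
      rw [this] at h0
      simp at h0
    have hfuel3 : E2.length + ([] : List Nat).length
        + (x.length + C + 1)
          * (pvUnc (pvMark clr (pvNewRows x clr clc x.length C))
            + pvUnc (pvMark clc
                (pvNewCols x (pvMark clr (pvNewRows x clr clc x.length C)) clc x.length C)))
        ≤ F - QR.length - (QC ++ E1).length := by
      have hs1 : (x.length + C + 1) * (pvUnc clr + pvUnc clc)
          = C * pvUnc clr + (x.length + 1) * pvUnc clr
            + (x.length * pvUnc clc + (C + 1) * pvUnc clc) := by ring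
      have hs2 : (x.length + C + 1)
          * (pvUnc (pvMark clr (pvNewRows x clr clc x.length C))
            + pvUnc (pvMark clc
                (pvNewCols x (pvMark clr (pvNewRows x clr clc x.length C)) clc x.length C)))
          = C * pvUnc (pvMark clr (pvNewRows x clr clc x.length C))
            + (x.length + 1) * pvUnc (pvMark clr (pvNewRows x clr clc x.length C))
            + (x.length * pvUnc (pvMark clc
                (pvNewCols x (pvMark clr (pvNewRows x clr clc x.length C)) clc x.length C))
              + (C + 1) * pvUnc (pvMark clc
                (pvNewCols x (pvMark clr (pvNewRows x clr clc x.length C)) clc x.length C))) := by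
        ring
      have hc1 : (x.length + 1) * pvUnc (pvMark clr (pvNewRows x clr clc x.length C))
          ≤ (x.length + 1) * pvUnc clr := Nat.mul_le_mul_left _ hur
      have hc2 : (C + 1) * pvUnc (pvMark clc
            (pvNewCols x (pvMark clr (pvNewRows x clr clc x.length C)) clc x.length C))
          ≤ (C + 1) * pvUnc clc := Nat.mul_le_mul_left _ huc
      rw [List.length_append]
      simp only [List.length_nil]
      omega
    have hrec := ih E2 [] (F - QR.length - (QC ++ E1).length) rcnt' ccnt'
      (pvMark clr (pvNewRows x clr clc x.length C))
      (pvMark clc (pvNewCols x (pvMark clr (pvNewRows x clr clc x.length C)) clc x.length C))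
      hlr2 (by rw [pvMark_length]; exact hlc) hrc' hcc'
      hBr'' hBc3 hDr3 hDc3 (by omega) hfuel3
    simp only [List.map_nil, List.append_nil, List.nil_append] at heq2 hrec
    rw [heq1, heq2, hLB,
        if_neg (by
          intro hh
          simp only [Bool.and_eq_true, List.isEmpty_iff] at hh
          exact hfix hh)]
    exact hrec

-- the worklist computes the round semantics
lemma pvMainSim (x : List (List Int)) (C : Nat) :
    ∀ (m : Nat) (QR QC : List Nat) (F : Nat) (rcnt ccnt : List Int) (clr clc : List Bool),
    clr.length = x.length → clc.length = C → rcnt.length = x.length → ccnt.length = C →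
    (∀ i, i < x.length → clr.getD i false = false →
        rcnt.getD i 0 = (pvAliveRowCnt x clc i C : Int)) →
    (∀ j, j < C → clc.getD j false = false →
        ccnt.getD j 0 = (pvAliveColCnt x clr j x.length : Int)) →
    (∀ i, i < x.length → clr.getD i false = false → pvAliveRowCnt x clc i C = 1 → i ∈ QR) →
    (∀ j, j < C → clc.getD j false = false → pvAliveColCnt x clr j x.length = 1 → j ∈ QC) →
    pvUnc clr + pvUnc clc ≤ m →
    QR.length + QC.length + (x.length + C + 1) * (pvUnc clr + pvUnc clc) ≤ F →
    pvPop x C F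
        (QR.map (fun i => ((true, i) : Bool × Nat))
          ++ QC.map (fun j => ((false, j) : Bool × Nat))) rcnt ccnt clr clc
      = pvLoopB x x.length C (m + 1) clr clc := by
  intro m
  induction m with
  | zero =>
      intro QR QC F rcnt ccnt clr clc hlr hlc hrc hcc hBr hBc hDr hDc hm hFuel
      exact pvMainSimStep x C 0
        (fun QR' QC' F' rcnt' ccnt' clr' clc' _ _ _ _ _ _ _ _ hm' _ => absurd hm' (by omega))
        QR QC F rcnt ccnt clr clc hlr hlc hrc hcc hBr hBc hDr hDc hm hFuel
  | succ m ih =>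
      intro QR QC F rcnt ccnt clr clc hlr hlc hrc hcc hBr hBc hDr hDc hm hFuel
      exact pvMainSimStep x C (m + 1)
        (fun QR' QC' F' rcnt' ccnt' clr' clc' h1 h2 h3 h4 h5 h6 h7 h8 hm' hF' =>
          ih QR' QC' F' rcnt' ccnt' clr' clc' h1 h2 h3 h4 h5 h6 h7 h8 (by omega) hF')
        QR QC F rcnt ccnt clr clc hlr hlc hrc hcc hBr hBc hDr hDc hm hFuel

-- ===== initial state and final assembly =====

lemma pv_getD_replicate_false (n j : Nat) : (List.replicate n false).getD j false = false := by
  by_cases h : j < n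
  · rw [pv_getD_lt _ _ (by simpa using h)]; simp
  · rw [pv_getD_ge _ _ (by simpa using Nat.le_of_not_lt h)]

lemma pvRowCnt0_getD (x : List (List Int)) (C i : Nat) (hi : i < x.length) :
    (pvRowCnt0 x C).getD i 0 = (pvAliveRowCnt x (List.replicate C false) i C : Int) := by
  unfold pvRowCnt0
  rw [pv_getD_lt _ _ (by simpa using hi)]
  rw [List.getElem_map, List.getElem_range]
  rw [pv_foldl_cnt_int (fun j => 0 ≤ (x.getD i []).getD j 0)]
  rw [pvArc_countP]
  have : (List.range C).countP
      (fun j => decide ((List.replicate C false).getD j false = false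
          ∧ 0 ≤ (x.getD i []).getD j 0))
      = (List.range C).countP (fun j => decide (0 ≤ (x.getD i []).getD j 0)) := by
    apply List.countP_congr
    intro j _
    simp [pv_getD_replicate_false]
  rw [this]
  simp

lemma pvColCnt0_getD (x : List (List Int)) (C j : Nat) (hj : j < C) :
    (pvColCnt0 x C).getD j 0
      = (pvAliveColCnt x (List.replicate x.length false) j x.length : Int) := by
  unfold pvColCnt0
  rw [pv_getD_lt _ _ (by simpa using hj)]
  rw [List.getElem_map, List.getElem_range]
  rw [pv_foldl_cnt_int (fun i => 0 ≤ (x.getD i []).getD j 0)]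
  rw [pvAcc_countP]
  have : (List.range x.length).countP
      (fun i => decide ((List.replicate x.length false).getD i false = false
          ∧ 0 ≤ (x.getD i []).getD j 0))
      = (List.range x.length).countP (fun i => decide (0 ≤ (x.getD i []).getD j 0)) := by
    apply List.countP_congr
    intro i _
    simp [pv_getD_replicate_false]
  rw [this]
  simp

theorem clipping_spec : Claim_equal_clipping := by
  intro x _ hpre
  obtain ⟨hpos, hx⟩ := hpre
  show clipping x = clipping_alt x
  have hsim := pvMainSim x (x.getD 0 []).length (x.length + (x.getD 0 []).length)
    ((List.range x.length).filter (fun i => (pvRowCnt0 x (x.getD 0 []).length).getD i 0 == 1))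
    ((List.range (x.getD 0 []).length).filter
      (fun j => (pvColCnt0 x (x.getD 0 []).length).getD j 0 == 1))
    ((x.length + (x.getD 0 []).length + 1) * (x.length + (x.getD 0 []).length + 1))
    (pvRowCnt0 x (x.getD 0 []).length) (pvColCnt0 x (x.getD 0 []).length)
    (List.replicate x.length false) (List.replicate (x.getD 0 []).length false)
    (by simp) (by simp) (by simp [pvRowCnt0]) (by simp [pvColCnt0])
    (fun i hi _ => pvRowCnt0_getD x (x.getD 0 []).length i hi)
    (fun j hj _ => pvColCnt0_getD x (x.getD 0 []).length j hj)
    ?_ ?_ ?_ ?_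
  · have hA : clipping x
        = pvMat x
            (pvLoopB x x.length (x.getD 0 []).length (x.length + (x.getD 0 []).length + 1)
              (List.replicate x.length false) (List.replicate (x.getD 0 []).length false)).1
            (pvLoopB x x.length (x.getD 0 []).length (x.length + (x.getD 0 []).length + 1)
              (List.replicate x.length false) (List.replicate (x.getD 0 []).length false)).2
            (x.getD 0 []).length := by
      have hA' := pvLoop_eq x (x.getD 0 []).length hx (x.length + (x.getD 0 []).length + 1)
        (List.replicate x.length false) (List.replicate (x.getD 0 []).length false)
        (by simp) (by simp)
      rw [pvMat_init x (x.getD 0 []).length] at hA'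
      exact hA'
    have hB : clipping_alt x
        = pvWriteCols (pvWriteRows x
            (pvPop x (x.getD 0 []).length
              ((x.length + (x.getD 0 []).length + 1) * (x.length + (x.getD 0 []).length + 1))
              (((List.range x.length).filter
                  (fun i => (pvRowCnt0 x (x.getD 0 []).length).getD i 0 == 1)).map
                    (fun i => ((true, i) : Bool × Nat))
                ++ ((List.range (x.getD 0 []).length).filter
                  (fun j => (pvColCnt0 x (x.getD 0 []).length).getD j 0 == 1)).map
                    (fun j => ((false, j) : Bool × Nat)))
              (pvRowCnt0 x (x.getD 0 []).length) (pvColCnt0 x (x.getD 0 []).length)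
              (List.replicate x.length false) (List.replicate (x.getD 0 []).length false)).1
            x.length (x.getD 0 []).length)
            (pvPop x (x.getD 0 []).length
              ((x.length + (x.getD 0 []).length + 1) * (x.length + (x.getD 0 []).length + 1))
              (((List.range x.length).filter
                  (fun i => (pvRowCnt0 x (x.getD 0 []).length).getD i 0 == 1)).map
                    (fun i => ((true, i) : Bool × Nat))
                ++ ((List.range (x.getD 0 []).length).filter
                  (fun j => (pvColCnt0 x (x.getD 0 []).length).getD j 0 == 1)).map
                    (fun j => ((false, j) : Bool × Nat)))
              (pvRowCnt0 x (x.getD 0 []).length) (pvColCnt0 x (x.getD 0 []).length)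
              (List.replicate x.length false) (List.replicate (x.getD 0 []).length false)).2
            x.length (x.getD 0 []).length := rfl
    rw [hA, hB, pvWriteBack_eq, hsim]
  · intro i hi _ harc
    rw [List.mem_filter]
    refine ⟨List.mem_range.mpr hi, ?_⟩
    rw [pvRowCnt0_getD x (x.getD 0 []).length i hi, harc]
    simp
  · intro j hj _ hacc
    rw [List.mem_filter]
    refine ⟨List.mem_range.mpr hj, ?_⟩
    rw [pvColCnt0_getD x (x.getD 0 []).length j hj, hacc]
    simp
  · rw [pvUnc_replicate, pvUnc_replicate]
  · rw [pvUnc_replicate, pvUnc_replicate]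
    have h1 : ((List.range x.length).filter
        (fun i => (pvRowCnt0 x (x.getD 0 []).length).getD i 0 == 1)).length ≤ x.length := by
      calc _ ≤ (List.range x.length).length := List.length_filter_le _ _
        _ = x.length := List.length_range
    have h2 : ((List.range (x.getD 0 []).length).filter
        (fun j => (pvColCnt0 x (x.getD 0 []).length).getD j 0 == 1)).length
          ≤ (x.getD 0 []).length := by
      calc _ ≤ (List.range (x.getD 0 []).length).length := List.length_filter_le _ _
        _ = (x.getD 0 []).length := List.length_range
    have h3 : (x.length + (x.getD 0 []).length + 1) * (x.length + (x.getD 0 []).length + 1)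
        = (x.length + (x.getD 0 []).length + 1) * (x.length + (x.getD 0 []).length)
          + (x.length + (x.getD 0 []).length + 1) := by ring
    omega
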